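-- pv_equiv track=rewrite | github.com/ksomemo/Competitive-programming | atcoder/other/aising/aising2019/C.py | editorial
-- ===== SOURCE A (Python) =====
-- def editorial(H, W, S):
--     """
--     ある地点からの黒と白のマスの数
--     黒から白への行き方は
--     黒の数から白の数
--     """
--     from collections import deque
--     di = [1, 0, -1, 0]
--     dj = [0, 1, 0, -1]
--     color = [[S[i][j] == "#" for j in range(W)]
--              for i in range(H)]
--     used = [[False] * W for i in range(H)]
--
--     ans = 0
--     for i in range(H):
--         for j in range(W):
--             if used[i][j]:
--                 continue
--             used[i][j] = True
--
--             b, w = 0, 0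
--             que = deque([(i, j)])
--             while que:
--                 ci, cj = que.pop()
--                 if color[ci][cj]:
--                     b += 1
--                 else:
--                     w += 1
--
--                 for d in range(4):
--                     ni = ci + di[d]
--                     nj = cj + dj[d]
--                     in_range = 0 <= ni < H and 0 <= nj < W
--                     if not in_range:
--                         continue
--                     if used[ni][nj]:
--                         continue
--                     if color[ci][cj] == color[ni][nj]:
--                         continue
--
--                     used[ni][nj] = True
--                     que.append((ni, nj))
--
--             ans += b * w
--
--     return ans
-- ===== SOURCE B (Python) =====
-- def editorial(H, W, S):
--     # Connected-component labeling by synchronous min-label propagation to a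
--     # fixpoint, then one counting pass per label; no search, no stack/queue.
--     if H <= 0 or W <= 0:
--         return 0
--     n = H * W
--     col = [S[i][j] == "#" for i in range(H) for j in range(W)]
--     lab = list(range(n))
--     changed = True
--     while changed:
--         new = []
--         for k in range(n):
--             i, j = divmod(k, W)
--             v = lab[k]
--             if j + 1 < W and col[k] != col[k + 1]:
--                 v = min(v, lab[k + 1])
--             if j > 0 and col[k] != col[k - 1]:
--                 v = min(v, lab[k - 1])
--             if i + 1 < H and col[k] != col[k + W]:
--                 v = min(v, lab[k + W])
--             if i > 0 and col[k] != col[k - W]: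
--                 v = min(v, lab[k - W])
--             new.append(v)
--         changed = new != lab
--         lab = new
--     black = [0] * n
--     size = [0] * n
--     for k in range(n):
--         r = lab[k]
--         size[r] += 1
--         if col[k]:
--             black[r] += 1
--     return sum(black[r] * (size[r] - black[r]) for r in range(n))
-- ===== Notes on version B (the rewrite author's own statement) =====
-- stated objective: alternative
-- what changed: Replaces the per-component DFS flood fill (deque + used matrix, summing b*w per component) by synchronous min-label propagation to a fixpoint over the whole grid followed by one flat counting pass per label; Pre_ excludes exactly the inputs where A raises an IndexError, which is possible only when W > 0: fewer than H rows, or a row among the first H shorter than W.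
import Mathlib
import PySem

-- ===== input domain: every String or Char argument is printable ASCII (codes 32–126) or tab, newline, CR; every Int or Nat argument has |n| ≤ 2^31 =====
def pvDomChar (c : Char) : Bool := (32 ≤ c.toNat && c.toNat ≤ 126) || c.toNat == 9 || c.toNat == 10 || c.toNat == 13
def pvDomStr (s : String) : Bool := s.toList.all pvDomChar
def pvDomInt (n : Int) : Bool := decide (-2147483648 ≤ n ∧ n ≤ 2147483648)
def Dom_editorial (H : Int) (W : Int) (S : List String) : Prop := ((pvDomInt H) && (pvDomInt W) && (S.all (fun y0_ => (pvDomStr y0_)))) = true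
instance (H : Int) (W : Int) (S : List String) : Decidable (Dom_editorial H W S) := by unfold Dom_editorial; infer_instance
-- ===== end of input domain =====

-- B replaces A's per-component DFS flood fill by synchronous min-label propagation to a
-- fixpoint plus one flat counting pass per label (alternative algorithm, not claimed faster).


-- ===== PORT A =====
def colAt (S : List String) (i j : Nat) : Bool := ((S.getD i "").toList.getD j ' ') == '#'

def dirsA : List (Int × Int) := [(1,0),(0,1),(-1,0),(0,-1)]

def floodPush (h w : Nat) (col : Nat → Nat → Bool) (ci cj : Nat)
    (st : ((Nat × Nat) → Bool) × List (Nat × Nat)) (d : Int × Int) :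
    ((Nat × Nat) → Bool) × List (Nat × Nat) :=
  let ni : Int := (ci : Int) + d.1
  let nj : Int := (cj : Int) + d.2
  if 0 ≤ ni ∧ ni < (h : Int) ∧ 0 ≤ nj ∧ nj < (w : Int) then
    let p : Nat × Nat := (ni.toNat, nj.toNat)
    if st.1 p then st
    else if col ci cj == col p.1 p.2 then st
    else (fun q => if q = p then true else st.1 q, p :: st.2)
  else st

def floodLoop (h w : Nat) (col : Nat → Nat → Bool) :
    Nat → ((Nat × Nat) → Bool) → List (Nat × Nat) → Int → Int →
    ((Nat × Nat) → Bool) × Int × Int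
  | 0, used, _, b, wc => (used, b, wc)          -- fuel guard only; the supplied fuel is proved sufficient
  | _ + 1, used, [], b, wc => (used, b, wc)
  | fuel + 1, used, c :: rest, b, wc =>
    let b' := if col c.1 c.2 then b + 1 else b
    let wc' := if col c.1 c.2 then wc else wc + 1
    let st := dirsA.foldl (floodPush h w col c.1 c.2) (used, [])
    floodLoop h w col fuel st.1 (st.2 ++ rest) b' wc'

def editorial (H : Int) (W : Int) (S : List String) : Int :=
  let h := H.toNat
  let w := W.toNat
  let col := colAt S
  ((List.range h).foldl (fun (st : ((Nat × Nat) → Bool) × Int) i =>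
      (List.range w).foldl (fun st j =>
        if st.1 (i, j) then st
        else
          let used1 : (Nat × Nat) → Bool := fun q => if q = (i, j) then true else st.1 q
          let r := floodLoop h w col (h * w + 1) used1 [(i, j)] 0 0
          (r.1, st.2 + r.2.1 * r.2.2)) st)
    ((fun _ => false), 0)).2

-- ===== PORT B =====
def labStep (h w : Nat) (col : List Bool) (lab : List Nat) : List Nat :=
  (List.range (h * w)).map (fun k =>
    let i := k / w
    let j := k % w
    let v0 := lab.getD k 0
    let v1 := if j + 1 < w ∧ col.getD k false ≠ col.getD (k + 1) false then min v0 (lab.getD (k + 1) 0) else v0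
    let v2 := if 0 < j ∧ col.getD k false ≠ col.getD (k - 1) false then min v1 (lab.getD (k - 1) 0) else v1
    let v3 := if i + 1 < h ∧ col.getD k false ≠ col.getD (k + w) false then min v2 (lab.getD (k + w) 0) else v2
    let v4 := if 0 < i ∧ col.getD k false ≠ col.getD (k - w) false then min v3 (lab.getD (k - w) 0) else v3
    v4)

def labLoop (h w : Nat) (col : List Bool) : Nat → List Nat → List Nat
  | 0, lab => lab                                -- fuel guard only; the supplied fuel is proved sufficient
  | fuel + 1, lab =>
    let new := labStep h w col lab
    if new = lab then lab else labLoop h w col fuel new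

def editorial_alt (H : Int) (W : Int) (S : List String) : Int :=
  if H ≤ 0 ∨ W ≤ 0 then 0
  else
    let h := H.toNat
    let w := W.toNat
    let n := h * w
    let col : List Bool := (List.range h).flatMap (fun i => (List.range w).map (fun j => colAt S i j))
    let lab := labLoop h w col (n * n + 1) (List.range n)
    let cnt := (List.range n).foldl
      (fun (st : (Nat → Int) × (Nat → Int)) k =>
        let r := lab.getD k 0
        ((fun x => if x = r then st.1 x + (if col.getD k false then 1 else 0) else st.1 x),
         (fun x => if x = r then st.2 x + 1 else st.2 x)))
      ((fun _ => 0), (fun _ => 0))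
    ((List.range n).map (fun r => cnt.1 r * (cnt.2 r - cnt.1 r))).sum

-- ===== PRECONDITION & SPEC =====
-- Pre_ excludes exactly the inputs where Python A raises an IndexError (possible only when
-- W > 0): fewer than H rows, or one of the first H rows shorter than W.
def Pre_editorial (H : Int) (W : Int) (S : List String) : Prop :=
  0 < W → (H.toNat ≤ S.length ∧ ∀ s ∈ S.take H.toNat, W.toNat ≤ s.toList.length)
instance (H : Int) (W : Int) (S : List String) : Decidable (Pre_editorial H W S) := by
  unfold Pre_editorial; infer_instance

def pvWitness_editorial : Int × Int × List String := (2, 2, ["#.", ".#"])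

def Spec_editorial (H : Int) (W : Int) (S : List String) (out : Int) : Prop := out = editorial_alt H W S
instance (H : Int) (W : Int) (S : List String) (out : Int) : Decidable (Spec_editorial H W S out) := by
  unfold Spec_editorial; infer_instance

-- ===== CLAIM (what is proved, stated in full; the proofs are below) =====
def Claim_equal_editorial : Prop := ∀ (H : Int) (W : Int) (S : List String), Dom_editorial H W S → Pre_editorial H W S → Spec_editorial H W S (editorial H W S)

-- ===== LEMMAS AND PROOFS =====

-- ---- spec-side notions: the grid graph, connectivity, component counts ----
noncomputable def cfilter {α : Type} (p : α → Prop) (s : Finset α) : Finset α :=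
  @Finset.filter α p (fun x => Classical.propDecidable (p x)) s

lemma mem_cfilter {α : Type} {p : α → Prop} {s : Finset α} {a : α} :
    a ∈ cfilter p s ↔ a ∈ s ∧ p a := by
  unfold cfilter; exact @Finset.mem_filter _ p (fun x => Classical.propDecidable (p x)) s a

-- the different-color adjacency between in-range cells
def Egr (h w : Nat) (col : Nat → Nat → Bool) (p q : Nat × Nat) : Prop :=
  p.1 < h ∧ p.2 < w ∧ q.1 < h ∧ q.2 < w ∧ col p.1 p.2 ≠ col q.1 q.2 ∧
    ∃ d ∈ dirsA, (q.1 : Int) = (p.1 : Int) + d.1 ∧ (q.2 : Int) = (p.2 : Int) + d.2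

def Conn (h w : Nat) (col : Nat → Nat → Bool) : Nat × Nat → Nat × Nat → Prop :=
  Relation.ReflTransGen (Egr h w col)

def gridF (h w : Nat) : Finset (Nat × Nat) := Finset.range h ×ˢ Finset.range w

noncomputable def compF (h w : Nat) (col : Nat → Nat → Bool) (s : Nat × Nat) : Finset (Nat × Nat) :=
  cfilter (fun q => Conn h w col s q) (gridF h w)

noncomputable def cntB (col : Nat → Nat → Bool) (C : Finset (Nat × Nat)) : Nat :=
  (cfilter (fun q => col q.1 q.2 = true) C).card
noncomputable def cntW (col : Nat → Nat → Bool) (C : Finset (Nat × Nat)) : Nat :=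
  (cfilter (fun q => col q.1 q.2 = false) C).card

def usedRep (used : (Nat × Nat) → Bool) (U : Finset (Nat × Nat)) : Prop :=
  ∀ q, used q = true ↔ q ∈ U

-- basic graph lemmas
lemma Egr_symm {h w : Nat} {col : Nat → Nat → Bool} {p q : Nat × Nat} :
    Egr h w col p q → Egr h w col q p := by
  rintro ⟨h1, h2, h3, h4, h5, d, hd, he1, he2⟩
  refine ⟨h3, h4, h1, h2, Ne.symm h5, ?_⟩
  simp only [dirsA, List.mem_cons, List.not_mem_nil, or_false] at hd
  rcases hd with rfl | rfl | rfl | rfl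
  · exact ⟨(-1, 0), by simp [dirsA], by omega, by omega⟩
  · exact ⟨(0, -1), by simp [dirsA], by omega, by omega⟩
  · exact ⟨(1, 0), by simp [dirsA], by omega, by omega⟩
  · exact ⟨(0, 1), by simp [dirsA], by omega, by omega⟩

lemma Conn_symm {h w : Nat} {col : Nat → Nat → Bool} {p q : Nat × Nat} :
    Conn h w col p q → Conn h w col q p :=
  fun hc => Relation.ReflTransGen.symmetric (fun _ _ he => Egr_symm he) hc

lemma Conn_grid {h w : Nat} {col : Nat → Nat → Bool} {p q : Nat × Nat} :
    p ∈ gridF h w → Conn h w col p q → q ∈ gridF h w := by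
  intro hp hc
  induction hc with
  | refl => exact hp
  | tail _ hE _ =>
    obtain ⟨_, _, h3, h4, _⟩ := hE
    simp only [gridF, Finset.mem_product, Finset.mem_range]
    exact ⟨h3, h4⟩

lemma closed_conn {h w : Nat} {col : Nat → Nat → Bool} {U : Finset (Nat × Nat)}
    (hcl : ∀ p ∈ U, ∀ q, Egr h w col p q → q ∈ U) {p q : Nat × Nat}
    (hp : p ∈ U) (hc : Conn h w col p q) : q ∈ U := by
  induction hc with
  | refl => exact hp
  | tail _ hE ih => exact hcl _ ih _ hE

lemma conn_not_mem_closed {h w : Nat} {col : Nat → Nat → Bool} {U : Finset (Nat × Nat)}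
    (hcl : ∀ p ∈ U, ∀ q, Egr h w col p q → q ∈ U) {s q : Nat × Nat}
    (hs : s ∉ U) (hc : Conn h w col s q) : q ∉ U := by
  intro hq
  exact hs (closed_conn hcl hq (Conn_symm hc))

-- ---- A-side: the four-direction push fold ----
lemma floodPush_fold (h w : Nat) (col : Nat → Nat → Bool) (ci cj : Nat)
    (hci : ci < h) (hcj : cj < w) (used : (Nat × Nat) → Bool)
    (ds : List (Int × Int)) (hsub : ∀ d ∈ ds, d ∈ dirsA)
    (st0 : ((Nat × Nat) → Bool) × List (Nat × Nat))
    (h1 : ∀ q, st0.1 q = true ↔ (used q = true ∨ q ∈ st0.2))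
    (h2 : st0.2.Nodup)
    (h3 : ∀ q ∈ st0.2, Egr h w col (ci, cj) q ∧ used q = false) :
    (∀ q, (ds.foldl (floodPush h w col ci cj) st0).1 q = true ↔
        (used q = true ∨ q ∈ (ds.foldl (floodPush h w col ci cj) st0).2)) ∧
    (ds.foldl (floodPush h w col ci cj) st0).2.Nodup ∧
    (∀ q ∈ (ds.foldl (floodPush h w col ci cj) st0).2, Egr h w col (ci, cj) q ∧ used q = false) ∧
    (∀ d ∈ ds, ∀ q : Nat × Nat, Egr h w col (ci, cj) q →
        (q.1 : Int) = (ci : Int) + d.1 → (q.2 : Int) = (cj : Int) + d.2 →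
        (ds.foldl (floodPush h w col ci cj) st0).1 q = true) ∧
    (∀ q ∈ st0.2, q ∈ (ds.foldl (floodPush h w col ci cj) st0).2) := by
  induction ds generalizing st0 with
  | nil =>
    refine ⟨h1, h2, h3, ?_, ?_⟩
    · intro d hd; simp at hd
    · intro q hq; simpa using hq
  | cons d ds ih =>
    have hd : d ∈ dirsA := hsub d (List.mem_cons_self ..)
    have hsub' : ∀ e ∈ ds, e ∈ dirsA := fun e he => hsub e (List.mem_cons_of_mem _ he)
    -- one push step
    set st1 := floodPush h w col ci cj st0 d with hst1
    have key : (∀ q, st1.1 q = true ↔ (used q = true ∨ q ∈ st1.2)) ∧ st1.2.Nodup ∧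
        (∀ q ∈ st1.2, Egr h w col (ci, cj) q ∧ used q = false) ∧
        (∀ q : Nat × Nat, Egr h w col (ci, cj) q →
            (q.1 : Int) = (ci : Int) + d.1 → (q.2 : Int) = (cj : Int) + d.2 →
            st1.1 q = true) ∧
        (∀ q ∈ st0.2, q ∈ st1.2) := by
      rw [hst1]
      simp only [floodPush]
      by_cases hg : 0 ≤ (ci : Int) + d.1 ∧ (ci : Int) + d.1 < (h : Int) ∧
          0 ≤ (cj : Int) + d.2 ∧ (cj : Int) + d.2 < (w : Int)
      · rw [if_pos hg]
        set p : Nat × Nat := (((ci : Int) + d.1).toNat, ((cj : Int) + d.2).toNat) with hp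
        have hqp : ∀ q : Nat × Nat, (q.1 : Int) = (ci : Int) + d.1 →
            (q.2 : Int) = (cj : Int) + d.2 → q = p := by
          intro q e1 e2
          have : q.1 = ((ci : Int) + d.1).toNat := by omega
          have : q.2 = ((cj : Int) + d.2).toNat := by omega
          simp only [hp]; exact Prod.ext (by omega) (by omega)
        by_cases hu : st0.1 p = true
        · rw [if_pos (by simpa using hu)]
          refine ⟨h1, h2, h3, ?_, fun q hq => hq⟩
          intro q _ e1 e2
          rw [hqp q e1 e2]; exact hu
        · rw [if_neg (by simpa using hu)]
          by_cases hc : col ci cj == col p.1 p.2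
          · rw [if_pos (by simpa using hc)]
            refine ⟨h1, h2, h3, ?_, fun q hq => hq⟩
            intro q hE e1 e2
            exfalso
            have := hqp q e1 e2
            subst this
            exact hE.2.2.2.2.1 (by simpa using hc)
          · rw [if_neg (by simpa using hc)]
            have hpnot : p ∉ st0.2 := by
              intro hmem
              have := (h1 p).2 (Or.inr hmem)
              exact hu this
            have hpused : used p = false := by
              by_contra hcontra
              have : used p = true := by
                cases hb : used p with
                | false => exact absurd hb hcontra
                | true => rfl
              exact hu ((h1 p).2 (Or.inl this))
            have hpE : Egr h w col (ci, cj) p := by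
              refine ⟨hci, hcj, by simp only [hp]; omega, by simp only [hp]; omega,
                by simpa using hc, d, hd, by simp only [hp]; omega, by simp only [hp]; omega⟩
            simp only [← hp]
            refine ⟨?_, ?_, ?_, ?_, ?_⟩
            · intro q
              by_cases hqeq : q = p
              · subst hqeq; simp [hpused]
              · rw [if_neg hqeq]
                simp only [List.mem_cons]
                rw [h1 q]
                constructor
                · rintro (h | h)
                  · exact Or.inl h
                  · exact Or.inr (Or.inr h)
                · rintro (h | h | h)
                  · exact Or.inl h
                  · exact absurd h hqeq
                  · exact Or.inr h
            · exact List.nodup_cons.2 ⟨hpnot, h2⟩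
            · intro q hq
              rcases List.mem_cons.1 hq with rfl | hq
              · exact ⟨hpE, hpused⟩
              · exact h3 q hq
            · intro q _ e1 e2
              rw [hqp q e1 e2]; simp
            · intro q hq; exact List.mem_cons_of_mem _ hq

      · rw [if_neg hg]
        refine ⟨h1, h2, h3, ?_, fun q hq => hq⟩
        intro q hE e1 e2
        exfalso
        apply hg
        refine ⟨by omega, ?_, by omega, ?_⟩
        · rw [← e1]; exact_mod_cast Nat.cast_lt.2 hE.2.2.1
        · rw [← e2]; exact_mod_cast Nat.cast_lt.2 hE.2.2.2.1
    obtain ⟨k1, k2, k3, k4, k5⟩ := key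
    have rest := ih hsub' st1 k1 k2 k3
    obtain ⟨r1, r2, r3, r4, r5⟩ := rest
    have hfold : (d :: ds).foldl (floodPush h w col ci cj) st0 =
        ds.foldl (floodPush h w col ci cj) st1 := by rw [List.foldl_cons, hst1]
    rw [hfold]
    refine ⟨r1, r2, r3, ?_, ?_⟩
    · intro e he q hE e1 e2
      rcases List.mem_cons.1 he with rfl | he
      · -- covered at this step; marking is monotone into the rest of the fold
        have := k4 q hE e1 e2
        have hq : used q = true ∨ q ∈ st1.2 := (k1 q).1 this
        rcases hq with hq | hq
        · exact (r1 q).2 (Or.inl hq)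
        · exact (r1 q).2 (Or.inr (r5 q hq))
      · exact r4 e he q hE e1 e2
    · intro q hq
      exact r5 q (k5 q hq)

lemma flood_expand (h w : Nat) (col : Nat → Nat → Bool) (ci cj : Nat)
    (hci : ci < h) (hcj : cj < w) (used : (Nat × Nat) → Bool) :
    (∀ q, (dirsA.foldl (floodPush h w col ci cj) (used, [])).1 q = true ↔
        (used q = true ∨ q ∈ (dirsA.foldl (floodPush h w col ci cj) (used, [])).2)) ∧
    (dirsA.foldl (floodPush h w col ci cj) (used, [])).2.Nodup ∧
    (∀ q ∈ (dirsA.foldl (floodPush h w col ci cj) (used, [])).2,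
        Egr h w col (ci, cj) q ∧ used q = false) ∧
    (∀ q, Egr h w col (ci, cj) q →
        (dirsA.foldl (floodPush h w col ci cj) (used, [])).1 q = true) := by
  have main := floodPush_fold h w col ci cj hci hcj used dirsA (fun d hd => hd) (used, [])
    (by intro q; simp) List.nodup_nil (by intro q hq; simp at hq)
  obtain ⟨a1, a2, a3, a4, _⟩ := main
  refine ⟨a1, a2, a3, ?_⟩
  intro q hE
  obtain ⟨_, _, _, _, _, d, hd, e1, e2⟩ := id hE
  exact a4 d hd q hE e1 e2

lemma cfilter_insert_pos {α : Type} [DecidableEq α] {p : α → Prop} {a : α} {s : Finset α}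
    (ha : p a) : cfilter p (insert a s) = insert a (cfilter p s) := by
  ext x
  simp only [mem_cfilter, Finset.mem_insert]
  constructor
  · rintro ⟨rfl | hx, hp⟩
    · exact Or.inl rfl
    · exact Or.inr ⟨hx, hp⟩
  · rintro (rfl | ⟨hx, hp⟩)
    · exact ⟨Or.inl rfl, ha⟩
    · exact ⟨Or.inr hx, hp⟩

lemma cfilter_insert_neg {α : Type} [DecidableEq α] {p : α → Prop} {a : α} {s : Finset α}
    (ha : ¬ p a) : cfilter p (insert a s) = cfilter p s := by
  ext x
  simp only [mem_cfilter, Finset.mem_insert]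
  constructor
  · rintro ⟨rfl | hx, hp⟩
    · exact absurd hp ha
    · exact ⟨hx, hp⟩
  · rintro ⟨hx, hp⟩
    exact ⟨Or.inr hx, hp⟩

-- ---- A-side: full flood-fill correctness ----
lemma floodLoop_inv (h w : Nat) (col : Nat → Nat → Bool) (s : Nat × Nat)
    (hs : s ∈ gridF h w) (U0 : Finset (Nat × Nat))
    (hcl : ∀ p ∈ U0, ∀ q, Egr h w col p q → q ∈ U0) (hsU0 : s ∉ U0) :
    ∀ fuel (used : (Nat × Nat) → Bool) (que : List (Nat × Nat)) (b wc : Int)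
      (V : Finset (Nat × Nat)),
      usedRep used (U0 ∪ V) →
      que.Nodup →
      (∀ q ∈ que, q ∈ V) →
      (∀ q ∈ V, Conn h w col s q) →
      s ∈ V →
      (∀ p ∈ V, p ∉ que → ∀ q, Egr h w col p q → q ∈ V) →
      b = ((cntB col (V \ que.toFinset) : Nat) : Int) →
      wc = ((cntW col (V \ que.toFinset) : Nat) : Int) →
      (gridF h w \ (U0 ∪ V)).card + que.length < fuel →
      ∃ used', floodLoop h w col fuel used que b wc =
          (used', ((cntB col (compF h w col s) : Nat) : Int),
                  ((cntW col (compF h w col s) : Nat) : Int)) ∧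
        usedRep used' (U0 ∪ compF h w col s) := by
  intro fuel
  induction fuel with
  | zero =>
    intro used que b wc V _ _ _ _ _ _ _ _ hfuel
    omega
  | succ f ih =>
    intro used que b wc V h1 h2 h3 h4 h5 h6 hb hwc hfuel
    cases que with
    | nil =>
      have hVcomp : V = compF h w col s := by
        apply Finset.ext
        intro q
        constructor
        · intro hq
          rw [compF, mem_cfilter]
          exact ⟨Conn_grid hs (h4 q hq), h4 q hq⟩
        · intro hq
          rw [compF, mem_cfilter] at hq
          exact closed_conn (fun p hp q' hE => h6 p hp (by simp) q' hE) h5 hq.2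
      refine ⟨used, ?_, ?_⟩
      · show (used, b, wc) = _
        have : ([] : List (Nat × Nat)).toFinset = ∅ := rfl
        rw [hb, hwc, this]
        simp only [Finset.sdiff_empty, hVcomp]
      · rw [← hVcomp]; exact h1
    | cons c rest =>
      obtain ⟨c1, c2⟩ := c
      have hcV : (c1, c2) ∈ V := h3 _ (List.mem_cons_self ..)
      have hcConn : Conn h w col s (c1, c2) := h4 _ hcV
      have hcGrid : (c1, c2) ∈ gridF h w := Conn_grid hs hcConn
      have hc1 : c1 < h := by
        have := (Finset.mem_product.1 hcGrid).1; simpa using this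
      have hc2 : c2 < w := by
        have := (Finset.mem_product.1 hcGrid).2; simpa using this
      obtain ⟨e1, e2, e3, e4⟩ := flood_expand h w col c1 c2 hc1 hc2 used
      set st := dirsA.foldl (floodPush h w col c1 c2) (used, []) with hst
      set V' := V ∪ st.2.toFinset with hV'
      -- new cells are fresh grid cells
      have hnewGrid : ∀ q ∈ st.2, q ∈ gridF h w := by
        intro q hq
        obtain ⟨hE, _⟩ := e3 q hq
        simp only [gridF, Finset.mem_product, Finset.mem_range]
        exact ⟨hE.2.2.1, hE.2.2.2.1⟩
      have hnewFresh : ∀ q ∈ st.2, q ∉ U0 ∪ V := by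
        intro q hq hmem
        obtain ⟨_, hu⟩ := e3 q hq
        rw [← h1 q] at hmem
        rw [hu] at hmem
        simp at hmem
      have hnewConn : ∀ q ∈ st.2, Conn h w col s q := by
        intro q hq
        exact Relation.ReflTransGen.tail hcConn (e3 q hq).1
      have hrestV : ∀ q ∈ rest, q ∈ V := fun q hq => h3 q (List.mem_cons_of_mem _ hq)
      have husedV : ∀ q ∈ V, used q = true := fun q hq => (h1 q).2 (Finset.mem_union_right _ hq)
      have hdisjnew : ∀ q ∈ st.2, q ∉ rest := by
        intro q hq hmem
        obtain ⟨_, hu⟩ := e3 q hq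
        rw [husedV q (hrestV q hmem)] at hu
        simp at hu
      have hcNotNew : (c1, c2) ∉ st.2 := by
        intro hmem
        obtain ⟨_, hu⟩ := e3 _ hmem
        rw [husedV _ hcV] at hu
        simp at hu
      have hcNotRest : (c1, c2) ∉ rest := (List.nodup_cons.1 h2).1
      -- the processed set grows by exactly c
      have hPset : V' \ (st.2 ++ rest).toFinset = insert (c1, c2) (V \ ((c1, c2) :: rest).toFinset) := by
        ext x
        simp only [hV', Finset.mem_sdiff, Finset.mem_union, Finset.mem_insert,
          List.mem_toFinset, List.mem_append, List.mem_cons]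
        constructor
        · rintro ⟨hx | hx, hnx⟩
          · by_cases hxc : x = (c1, c2)
            · exact Or.inl hxc
            · exact Or.inr ⟨hx, fun hcase => hcase.elim (fun hh => hxc hh) (fun hh => hnx (Or.inr hh))⟩
          · exact absurd (Or.inl (List.mem_toFinset.1 (by simpa using hx))) hnx
        · rintro (rfl | ⟨hx, hnx⟩)
          · refine ⟨Or.inl hcV, ?_⟩
            rintro (hh | hh)
            · exact hcNotNew hh
            · exact hcNotRest hh
          · refine ⟨Or.inl hx, ?_⟩
            rintro (hh | hh)
            · exact hnewFresh x hh (Finset.mem_union_right _ hx)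
            · exact hnx (Or.inr hh)
      have hcNotP : (c1, c2) ∉ V \ ((c1, c2) :: rest).toFinset := by
        simp [List.mem_toFinset]
      -- apply the induction hypothesis
      have happ := ih st.1 (st.2 ++ rest)
        (if col c1 c2 then b + 1 else b) (if col c1 c2 then wc else wc + 1) V'
      have hres : ∃ used', floodLoop h w col f st.1 (st.2 ++ rest)
          (if col c1 c2 then b + 1 else b) (if col c1 c2 then wc else wc + 1) =
          (used', ((cntB col (compF h w col s) : Nat) : Int),
                  ((cntW col (compF h w col s) : Nat) : Int)) ∧
          usedRep used' (U0 ∪ compF h w col s) := by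
        apply happ
        · intro q
          rw [e1 q, h1 q]
          simp only [hV', Finset.mem_union, List.mem_toFinset]
          tauto
        · refine List.Nodup.append e2 (List.nodup_cons.1 h2).2 ?_
          intro q hq1 hq2
          exact hdisjnew q hq1 hq2
        · intro q hq
          rcases List.mem_append.1 hq with hq | hq
          · simp only [hV', Finset.mem_union, List.mem_toFinset]; exact Or.inr hq
          · simp only [hV', Finset.mem_union]; exact Or.inl (hrestV q hq)
        · intro q hq
          rcases Finset.mem_union.1 hq with hq | hq
          · exact h4 q hq
          · exact hnewConn q (List.mem_toFinset.1 hq)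
        · exact Finset.mem_union_left _ h5
        · intro p hp hpque q' hE
          rcases Finset.mem_union.1 hp with hpV | hpNew
          · by_cases hpc : p = (c1, c2)
            · subst hpc
              have := e4 q' hE
              rw [e1 q'] at this
              rcases this with hq' | hq'
              · rw [h1 q'] at hq'
                rcases Finset.mem_union.1 hq' with hq' | hq'
                · exfalso
                  exact conn_not_mem_closed hcl hsU0
                    (Relation.ReflTransGen.tail hcConn hE) hq'
                · exact Finset.mem_union_left _ hq'
              · exact Finset.mem_union_right _ (List.mem_toFinset.2 hq')
            · have hpq : p ∉ (c1, c2) :: rest := by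
                intro hmem
                rcases List.mem_cons.1 hmem with hh | hh
                · exact hpc hh
                · exact hpque (List.mem_append.2 (Or.inr hh))
              exact Finset.mem_union_left _ (h6 p hpV hpq q' hE)
          · exact absurd (List.mem_append.2 (Or.inl (List.mem_toFinset.1 hpNew))) hpque
        · rw [hPset, hb]
          unfold cntB
          by_cases hcol : col c1 c2 = true
          · rw [if_pos hcol, cfilter_insert_pos (p := fun q => col q.1 q.2 = true) (a := ((c1, c2) : Nat × Nat)) (s := V \ ((c1, c2) :: rest).toFinset) hcol,
              Finset.card_insert_of_notMem (fun hmem => hcNotP (mem_cfilter.1 hmem).1)]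
            push_cast; ring
          · rw [if_neg hcol, cfilter_insert_neg (p := fun q => col q.1 q.2 = true) (a := ((c1, c2) : Nat × Nat)) (s := V \ ((c1, c2) :: rest).toFinset) hcol]
        · rw [hPset, hwc]
          unfold cntW
          by_cases hcol : col c1 c2 = true
          · rw [if_pos hcol, cfilter_insert_neg (p := fun q => col q.1 q.2 = false) (a := ((c1, c2) : Nat × Nat)) (s := V \ ((c1, c2) :: rest).toFinset) (by simp [hcol])]
          · rw [if_neg hcol, cfilter_insert_pos (p := fun q => col q.1 q.2 = false) (a := ((c1, c2) : Nat × Nat)) (s := V \ ((c1, c2) :: rest).toFinset) (by simpa using hcol),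
              Finset.card_insert_of_notMem (fun hmem => hcNotP (mem_cfilter.1 hmem).1)]
            push_cast; ring
        · -- fuel bound
          have hsub2 : st.2.toFinset ⊆ gridF h w \ (U0 ∪ V) := by
            intro q hq
            rw [List.mem_toFinset] at hq
            exact Finset.mem_sdiff.2 ⟨hnewGrid q hq, hnewFresh q hq⟩
          have hsd : gridF h w \ (U0 ∪ V') = (gridF h w \ (U0 ∪ V)) \ st.2.toFinset := by
            ext x
            simp only [hV', Finset.mem_sdiff, Finset.mem_union, List.mem_toFinset]
            tauto
          have hcard : (gridF h w \ (U0 ∪ V')).card =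
              (gridF h w \ (U0 ∪ V)).card - st.2.toFinset.card := by
            rw [hsd, Finset.card_sdiff_of_subset hsub2]
          have hlen : st.2.toFinset.card = st.2.length := by
            rw [List.toFinset_card_of_nodup e2]
          have hle : st.2.toFinset.card ≤ (gridF h w \ (U0 ∪ V)).card :=
            Finset.card_le_card hsub2
          simp only [List.length_append, List.length_cons] at hfuel ⊢
          omega
      obtain ⟨used', heq, hrep⟩ := hres
      refine ⟨used', ?_, hrep⟩
      show floodLoop h w col (f + 1) used ((c1, c2) :: rest) b wc = _
      simp only [floodLoop]
      exact heq

-- ---- A-side: the outer row-major scan ----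
def cellsL (h w : Nat) : List (Nat × Nat) :=
  (List.range h).flatMap (fun i => (List.range w).map (fun j => (i, j)))

noncomputable def UQ (h w : Nat) (col : Nat → Nat → Bool) (Q : List (Nat × Nat)) : Finset (Nat × Nat) :=
  cfilter (fun p => ∃ q ∈ Q, Conn h w col q p) (gridF h w)

noncomputable def NpairsU (h w : Nat) (col : Nat → Nat → Bool) (Q : List (Nat × Nat)) : Nat :=
  (cfilter (fun pq : (Nat × Nat) × (Nat × Nat) =>
      Conn h w col pq.1 pq.2 ∧ col pq.1.1 pq.1.2 = true ∧ col pq.2.1 pq.2.2 = false ∧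
      ∃ q ∈ Q, Conn h w col q pq.1)
    (gridF h w ×ˢ gridF h w)).card

noncomputable def Npairs (h w : Nat) (col : Nat → Nat → Bool) : Nat :=
  (cfilter (fun pq : (Nat × Nat) × (Nat × Nat) =>
      Conn h w col pq.1 pq.2 ∧ col pq.1.1 pq.1.2 = true ∧ col pq.2.1 pq.2.2 = false)
    (gridF h w ×ˢ gridF h w)).card

lemma cfilter_congr {α : Type} {p q : α → Prop} {s : Finset α}
    (hpq : ∀ x ∈ s, p x ↔ q x) : cfilter p s = cfilter q s := by
  ext x
  simp only [mem_cfilter]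
  exact ⟨fun ⟨hx, hp⟩ => ⟨hx, (hpq x hx).1 hp⟩, fun ⟨hx, hq⟩ => ⟨hx, (hpq x hx).2 hq⟩⟩

lemma cfilter_of_false {α : Type} {p : α → Prop} {s : Finset α}
    (hp : ∀ x ∈ s, ¬ p x) : cfilter p s = ∅ := by
  ext x
  simp only [mem_cfilter, Finset.notMem_empty, iff_false]
  rintro ⟨hx, hpx⟩
  exact hp x hx hpx

lemma card_gridF (h w : Nat) : (gridF h w).card = h * w := by
  simp [gridF]

lemma UQ_closed (h w : Nat) (col : Nat → Nat → Bool) (Q : List (Nat × Nat)) :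
    ∀ p ∈ UQ h w col Q, ∀ q, Egr h w col p q → q ∈ UQ h w col Q := by
  intro p hp q hE
  rw [UQ, mem_cfilter] at hp ⊢
  obtain ⟨hg, q0, hq0, hconn⟩ := hp
  refine ⟨?_, q0, hq0, Relation.ReflTransGen.tail hconn hE⟩
  simp only [gridF, Finset.mem_product, Finset.mem_range]
  exact ⟨hE.2.2.1, hE.2.2.2.1⟩

lemma Npairs_step (h w : Nat) (col : Nat → Nat → Bool) (Q : List (Nat × Nat))
    (c : Nat × Nat) (hcnot : c ∉ UQ h w col Q) :
    NpairsU h w col (Q ++ [c]) =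
      NpairsU h w col Q + cntB col (compF h w col c) * cntW col (compF h w col c) := by
  have hsplit : cfilter (fun pq : (Nat × Nat) × (Nat × Nat) =>
      Conn h w col pq.1 pq.2 ∧ col pq.1.1 pq.1.2 = true ∧ col pq.2.1 pq.2.2 = false ∧
      ∃ q ∈ Q ++ [c], Conn h w col q pq.1) (gridF h w ×ˢ gridF h w) =
      cfilter (fun pq : (Nat × Nat) × (Nat × Nat) =>
        Conn h w col pq.1 pq.2 ∧ col pq.1.1 pq.1.2 = true ∧ col pq.2.1 pq.2.2 = false ∧
        ∃ q ∈ Q, Conn h w col q pq.1) (gridF h w ×ˢ gridF h w) ∪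
      cfilter (fun pq : (Nat × Nat) × (Nat × Nat) =>
        Conn h w col pq.1 pq.2 ∧ col pq.1.1 pq.1.2 = true ∧ col pq.2.1 pq.2.2 = false ∧
        Conn h w col c pq.1) (gridF h w ×ˢ gridF h w) := by
    ext pq
    simp only [mem_cfilter, Finset.mem_union, List.mem_append, List.mem_cons,
      List.not_mem_nil, or_false]
    constructor
    · rintro ⟨hg, hc1, hc2, hc3, q, (hq | rfl), hconn⟩
      · exact Or.inl ⟨hg, hc1, hc2, hc3, q, hq, hconn⟩
      · exact Or.inr ⟨hg, hc1, hc2, hc3, hconn⟩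
    · rintro (⟨hg, hc1, hc2, hc3, q, hq, hconn⟩ | ⟨hg, hc1, hc2, hc3, hconn⟩)
      · exact ⟨hg, hc1, hc2, hc3, q, Or.inl hq, hconn⟩
      · exact ⟨hg, hc1, hc2, hc3, c, Or.inr rfl, hconn⟩
  have hdisj : Disjoint
      (cfilter (fun pq : (Nat × Nat) × (Nat × Nat) =>
        Conn h w col pq.1 pq.2 ∧ col pq.1.1 pq.1.2 = true ∧ col pq.2.1 pq.2.2 = false ∧
        ∃ q ∈ Q, Conn h w col q pq.1) (gridF h w ×ˢ gridF h w))
      (cfilter (fun pq : (Nat × Nat) × (Nat × Nat) =>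
        Conn h w col pq.1 pq.2 ∧ col pq.1.1 pq.1.2 = true ∧ col pq.2.1 pq.2.2 = false ∧
        Conn h w col c pq.1) (gridF h w ×ˢ gridF h w)) := by
    rw [Finset.disjoint_left]
    intro pq hp1 hp2
    rw [mem_cfilter] at hp1 hp2
    obtain ⟨hg, _, _, _, q, hq, hconn1⟩ := hp1
    obtain ⟨_, _, _, _, hconn2⟩ := hp2
    apply hcnot
    rw [UQ, mem_cfilter]
    have hc1g : pq.1 ∈ gridF h w := (Finset.mem_product.1 hg).1
    refine ⟨Conn_grid hc1g (Conn_symm hconn2), q, hq,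
      Relation.ReflTransGen.trans hconn1 (Conn_symm hconn2)⟩
  have hprod : cfilter (fun pq : (Nat × Nat) × (Nat × Nat) =>
      Conn h w col pq.1 pq.2 ∧ col pq.1.1 pq.1.2 = true ∧ col pq.2.1 pq.2.2 = false ∧
      Conn h w col c pq.1) (gridF h w ×ˢ gridF h w) =
      (cfilter (fun q => col q.1 q.2 = true) (compF h w col c)) ×ˢ
      (cfilter (fun q => col q.1 q.2 = false) (compF h w col c)) := by
    ext pq
    simp only [mem_cfilter, Finset.mem_product, compF]
    constructor
    · rintro ⟨⟨hg1, hg2⟩, hconn, hb, hwd, hcc⟩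
      exact ⟨⟨⟨hg1, hcc⟩, hb⟩, ⟨⟨hg2, Relation.ReflTransGen.trans hcc hconn⟩, hwd⟩⟩
    · rintro ⟨⟨⟨hg1, hcc1⟩, hb⟩, ⟨⟨hg2, hcc2⟩, hwd⟩⟩
      exact ⟨⟨hg1, hg2⟩, Relation.ReflTransGen.trans (Conn_symm hcc1) hcc2, hb, hwd, hcc1⟩
  unfold NpairsU
  rw [hsplit, Finset.card_union_of_disjoint hdisj, hprod, Finset.card_product]
  rfl

lemma outer_fold (h w : Nat) (col : Nat → Nat → Bool) :
    ∀ (L Q : List (Nat × Nat)) (used : (Nat × Nat) → Bool) (ans : Int),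
      (∀ p ∈ L, p ∈ gridF h w) →
      usedRep used (UQ h w col Q) →
      ans = ((NpairsU h w col Q : Nat) : Int) →
      (L.foldl (fun st c =>
          if st.1 c then st
          else
            (let used1 : (Nat × Nat) → Bool := fun q => if q = c then true else st.1 q
             let r := floodLoop h w col (h * w + 1) used1 [c] 0 0
             (r.1, st.2 + r.2.1 * r.2.2))) (used, ans)).2 =
        ((NpairsU h w col (Q ++ L) : Nat) : Int) := by
  intro L
  induction L with
  | nil =>
    intro Q used ans _ _ hans
    simpa using hans
  | cons c L ih =>
    intro Q used ans hL hrep hans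
    have hcg : c ∈ gridF h w := hL c (List.mem_cons_self ..)
    have hLg : ∀ p ∈ L, p ∈ gridF h w := fun p hp => hL p (List.mem_cons_of_mem _ hp)
    rw [List.foldl_cons]
    by_cases hu : used c = true
    · -- c already belongs to an earlier component: nothing changes
      have hcU : c ∈ UQ h w col Q := (hrep c).1 hu
      obtain ⟨_, q0, hq0, hconn0⟩ := mem_cfilter.1 hcU
      have hUeq : UQ h w col (Q ++ [c]) = UQ h w col Q := by
        unfold UQ
        apply cfilter_congr
        intro p _
        constructor
        · rintro ⟨q, hq, hconn⟩
          rcases List.mem_append.1 hq with hq | hq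
          · exact ⟨q, hq, hconn⟩
          · rcases List.mem_cons.1 hq with rfl | hq
            · exact ⟨q0, hq0, Relation.ReflTransGen.trans hconn0 hconn⟩
            · simp at hq
        · rintro ⟨q, hq, hconn⟩
          exact ⟨q, List.mem_append.2 (Or.inl hq), hconn⟩
      have hNeq : NpairsU h w col (Q ++ [c]) = NpairsU h w col Q := by
        unfold NpairsU
        congr 1
        apply cfilter_congr
        intro pq _
        constructor
        · rintro ⟨h1', h2', h3', q, hq, hconn⟩
          rcases List.mem_append.1 hq with hq | hq
          · exact ⟨h1', h2', h3', q, hq, hconn⟩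
          · rcases List.mem_cons.1 hq with rfl | hq
            · exact ⟨h1', h2', h3', q0, hq0, Relation.ReflTransGen.trans hconn0 hconn⟩
            · simp at hq
        · rintro ⟨h1', h2', h3', q, hq, hconn⟩
          exact ⟨h1', h2', h3', q, List.mem_append.2 (Or.inl hq), hconn⟩
      rw [if_pos hu]
      have := ih (Q ++ [c]) used ans hLg (by rw [hUeq]; exact hrep) (by rw [hNeq]; exact hans)
      rw [this]
      rw [List.append_assoc]
      rfl
    · -- fresh component: flood it
      have hcnot : c ∉ UQ h w col Q := fun hmem => hu ((hrep c).2 hmem)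
      have hflood := floodLoop_inv h w col c hcg (UQ h w col Q) (UQ_closed h w col Q) hcnot
        (h * w + 1) (fun q => if q = c then true else used q) [c] 0 0 {c}
      have hused1 : usedRep (fun q => if q = c then true else used q) (UQ h w col Q ∪ {c}) := by
        intro q
        by_cases hq : q = c
        · subst hq; simp
        · show (if q = c then true else used q) = true ↔ _
          rw [if_neg hq, hrep q]
          constructor
          · intro hh
            exact Finset.mem_union_left _ hh
          · intro hh
            rcases Finset.mem_union.1 hh with hh | hh
            · exact hh
            · exact absurd (Finset.mem_singleton.1 hh) hq
      have hempty : ({c} : Finset (Nat × Nat)) \ ([c] : List (Nat × Nat)).toFinset = ∅ := by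
        ext x; simp
      have hres := hflood hused1 (List.nodup_singleton c) (by intro q hq; simpa using hq)
        (by intro q hq; rw [Finset.mem_singleton] at hq; subst hq; exact Relation.ReflTransGen.refl)
        (Finset.mem_singleton_self c)
        (by
          intro p hp hpq q hE
          rw [Finset.mem_singleton] at hp
          subst hp
          exact absurd (List.mem_singleton.2 rfl) hpq)
        (by rw [hempty]; simp [cntB, cfilter])
        (by rw [hempty]; simp [cntW, cfilter])
        (by
          have hsub : gridF h w \ (UQ h w col Q ∪ {c}) ⊆ (gridF h w).erase c := by
            intro x hx
            rw [Finset.mem_sdiff] at hx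
            refine Finset.mem_erase.2 ⟨?_, hx.1⟩
            intro hxc
            exact hx.2 (by rw [hxc]; exact Finset.mem_union_right _ (Finset.mem_singleton_self c))
          have h1' := Finset.card_le_card hsub
          have h2' := Finset.card_erase_of_mem hcg
          have h3' := card_gridF h w
          have hpos : 0 < (gridF h w).card := Finset.card_pos.2 ⟨c, hcg⟩
          simp only [List.length_singleton]
          omega)
      obtain ⟨used', heq, hrep'⟩ := hres
      rw [if_neg (by simpa using hu)]
      simp only [heq]
      have hUeq : UQ h w col (Q ++ [c]) = UQ h w col Q ∪ compF h w col c := by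
        unfold UQ compF
        ext p
        simp only [mem_cfilter, Finset.mem_union, List.mem_append, List.mem_cons,
          List.not_mem_nil, or_false]
        constructor
        · rintro ⟨hg, q, (hq | rfl), hconn⟩
          · exact Or.inl ⟨hg, q, hq, hconn⟩
          · exact Or.inr ⟨hg, hconn⟩
        · rintro (⟨hg, q, hq, hconn⟩ | ⟨hg, hconn⟩)
          · exact ⟨hg, q, Or.inl hq, hconn⟩
          · exact ⟨hg, c, Or.inr rfl, hconn⟩
      have := ih (Q ++ [c]) used'
        (ans + ((cntB col (compF h w col c) : Nat) : Int) * ((cntW col (compF h w col c) : Nat) : Int))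
        hLg (by rw [hUeq]; exact hrep')
        (by rw [Npairs_step h w col Q c hcnot, hans]; push_cast; ring)
      rw [this, List.append_assoc]
      rfl

lemma mem_cellsL {h w : Nat} {p : Nat × Nat} : p ∈ cellsL h w ↔ p ∈ gridF h w := by
  obtain ⟨i, j⟩ := p
  simp [cellsL, List.mem_flatMap, List.mem_map, List.mem_range, gridF,
    Finset.mem_product, Finset.mem_range, Prod.ext_iff]

lemma editorial_eq_Npairs (H W : Int) (S : List String) :
    editorial H W S = ((Npairs H.toNat W.toNat (colAt S) : Nat) : Int) := by
  have e0 : editorial H W S = ((List.range H.toNat).foldl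
      (fun (st : ((Nat × Nat) → Bool) × Int) i =>
        (List.range W.toNat).foldl (fun st j =>
          if st.1 (i, j) then st
          else
            (let used1 : (Nat × Nat) → Bool := fun q => if q = (i, j) then true else st.1 q
             let r := floodLoop H.toNat W.toNat (colAt S) (H.toNat * W.toNat + 1) used1 [(i, j)] 0 0
             (r.1, st.2 + r.2.1 * r.2.2))) st)
      ((fun _ => false), 0)).2 := rfl
  rw [e0]
  have hflat := (List.foldl_flatMap
    (l := List.range H.toNat)
    (f := fun i => (List.range W.toNat).map (fun j => (i, j)))
    (g := fun (st : ((Nat × Nat) → Bool) × Int) (c : Nat × Nat) =>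
      if st.1 c then st
      else
        (let used1 : (Nat × Nat) → Bool := fun q => if q = c then true else st.1 q
         let r := floodLoop H.toNat W.toNat (colAt S) (H.toNat * W.toNat + 1) used1 [c] 0 0
         (r.1, st.2 + r.2.1 * r.2.2)))
    (init := ((fun _ => false), 0))).symm
  simp only [List.foldl_map] at hflat
  have hbody : (List.range H.toNat).foldl
      (fun (st : ((Nat × Nat) → Bool) × Int) i =>
        (List.range W.toNat).foldl (fun st j =>
          if st.1 (i, j) then st
          else
            (let used1 : (Nat × Nat) → Bool := fun q => if q = (i, j) then true else st.1 q
             let r := floodLoop H.toNat W.toNat (colAt S) (H.toNat * W.toNat + 1) used1 [(i, j)] 0 0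
             (r.1, st.2 + r.2.1 * r.2.2))) st)
      ((fun _ => false), 0) =
      (cellsL H.toNat W.toNat).foldl
      (fun (st : ((Nat × Nat) → Bool) × Int) (c : Nat × Nat) =>
        if st.1 c then st
        else
          (let used1 : (Nat × Nat) → Bool := fun q => if q = c then true else st.1 q
           let r := floodLoop H.toNat W.toNat (colAt S) (H.toNat * W.toNat + 1) used1 [c] 0 0
           (r.1, st.2 + r.2.1 * r.2.2)))
      ((fun _ => false), 0) := by
    rw [cellsL]
    exact hflat
  rw [hbody]
  have hUempty : UQ H.toNat W.toNat (colAt S) [] = ∅ := by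
    apply cfilter_of_false
    rintro x _ ⟨q, hq, _⟩
    simp at hq
  have hNempty : NpairsU H.toNat W.toNat (colAt S) [] = 0 := by
    unfold NpairsU
    rw [cfilter_of_false (by rintro x _ ⟨_, _, _, q, hq, _⟩; simp at hq)]
    rfl
  have := outer_fold H.toNat W.toNat (colAt S) (cellsL H.toNat W.toNat) []
    (fun _ => false) 0 (fun p hp => mem_cellsL.1 hp)
    (by intro q; rw [hUempty]; simp)
    (by rw [hNempty]; rfl)
  rw [this]
  congr 1
  unfold NpairsU Npairs
  simp only [List.nil_append]
  congr 1
  apply cfilter_congr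
  intro pq hpq
  constructor
  · rintro ⟨h1', h2', h3', _⟩
    exact ⟨h1', h2', h3'⟩
  · rintro ⟨h1', h2', h3'⟩
    refine ⟨h1', h2', h3', pq.1, mem_cellsL.2 (Finset.mem_product.1 hpq).1,
      Relation.ReflTransGen.refl⟩

-- ---- B-side: ids, the id graph, bounded reachability ----
def decC (w k : Nat) : Nat × Nat := (k / w, k % w)

def Eid (h w : Nat) (col : Nat → Nat → Bool) (k m : Nat) : Prop :=
  k < h * w ∧ m < h * w ∧ Egr h w col (decC w k) (decC w m)

def ConnId (h w : Nat) (col : Nat → Nat → Bool) : Nat → Nat → Prop :=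
  Relation.ReflTransGen (Eid h w col)

def reachIn (h w : Nat) (col : Nat → Nat → Bool) : Nat → Nat → Nat → Prop
  | 0, x, y => x = y ∧ x < h * w
  | t + 1, x, y => reachIn h w col t x y ∨ ∃ z, reachIn h w col t x z ∧ Eid h w col z y

noncomputable def SR (h w : Nat) (col : Nat → Nat → Bool) (t k : Nat) : Finset Nat :=
  cfilter (fun m => reachIn h w col t m k) (Finset.range (h * w))

noncomputable def classSet (h w : Nat) (col : Nat → Nat → Bool) (k : Nat) : Finset Nat :=
  cfilter (fun m => ConnId h w col m k) (Finset.range (h * w))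

lemma classSet_nonempty {h w : Nat} {col : Nat → Nat → Bool} {k : Nat} (hk : k < h * w) :
    (classSet h w col k).Nonempty :=
  ⟨k, mem_cfilter.2 ⟨Finset.mem_range.2 hk, Relation.ReflTransGen.refl⟩⟩

noncomputable def rho (h w : Nat) (col : Nat → Nat → Bool) (k : Nat) : Nat :=
  if hk : k < h * w then (classSet h w col k).min' (classSet_nonempty hk) else k

def encC (w : Nat) (p : Nat × Nat) : Nat := p.1 * w + p.2

lemma decC_eq {w : Nat} (hw : 0 < w) {i j : Nat} (hj : j < w) : decC w (i * w + j) = (i, j) := by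
  unfold decC
  have hd : (i * w + j) / w = i := by
    rw [Nat.mul_comm, Nat.mul_add_div hw, Nat.div_eq_of_lt hj, Nat.add_zero]
  have hm : (i * w + j) % w = j := Nat.mul_add_mod_of_lt hj
  rw [hd, hm]

lemma encC_decC {w k : Nat} (_hw : 0 < w) : encC w (decC w k) = k := by
  unfold encC decC
  have := Nat.div_add_mod k w
  rw [Nat.mul_comm] at this
  exact this

lemma encC_lt {h w : Nat} {p : Nat × Nat} (hp : p ∈ gridF h w) : encC w p < h * w := by
  obtain ⟨h1, h2⟩ := Finset.mem_product.1 hp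
  rw [Finset.mem_range] at h1 h2
  calc p.1 * w + p.2 < p.1 * w + w := by omega
    _ = (p.1 + 1) * w := by ring
    _ ≤ h * w := Nat.mul_le_mul_right w h1

lemma decC_grid {h w k : Nat} (hw : 0 < w) (hk : k < h * w) : decC w k ∈ gridF h w := by
  simp only [decC, gridF, Finset.mem_product, Finset.mem_range]
  constructor
  · exact Nat.div_lt_of_lt_mul (by rw [Nat.mul_comm w h]; exact hk)
  · exact Nat.mod_lt _ hw

lemma Eid_symm {h w : Nat} {col : Nat → Nat → Bool} {k m : Nat} :
    Eid h w col k m → Eid h w col m k := fun ⟨h1, h2, h3⟩ => ⟨h2, h1, Egr_symm h3⟩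

lemma ConnId_symm {h w : Nat} {col : Nat → Nat → Bool} {k m : Nat} :
    ConnId h w col k m → ConnId h w col m k :=
  fun hc => Relation.ReflTransGen.symmetric (fun _ _ he => Eid_symm he) hc

lemma connId_of_conn {h w : Nat} {col : Nat → Nat → Bool} (hw : 0 < w)
    {p q : Nat × Nat} (hc : Conn h w col p q) (hp : p ∈ gridF h w) :
    ConnId h w col (encC w p) (encC w q) := by
  induction hc with
  | refl => exact Relation.ReflTransGen.refl
  | tail hxy hE ih =>
    refine Relation.ReflTransGen.tail ih ?_
    rename_i x y
    have hxg : x ∈ gridF h w := Conn_grid hp hxy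
    have hyg : y ∈ gridF h w := by
      simp only [gridF, Finset.mem_product, Finset.mem_range]
      exact ⟨hE.2.2.1, hE.2.2.2.1⟩
    refine ⟨encC_lt hxg, encC_lt hyg, ?_⟩
    have hx2 : x.2 < w := by simpa using (Finset.mem_product.1 hxg).2
    have hy2 : y.2 < w := by simpa using (Finset.mem_product.1 hyg).2
    have hdx : decC w (encC w x) = x := by
      obtain ⟨x1, x2⟩ := x; exact decC_eq hw hx2
    have hdy : decC w (encC w y) = y := by
      obtain ⟨y1, y2⟩ := y; exact decC_eq hw hy2
    rw [hdx, hdy]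
    exact hE

lemma conn_of_connId {h w : Nat} {col : Nat → Nat → Bool} {k m : Nat}
    (hc : ConnId h w col k m) : Conn h w col (decC w k) (decC w m) := by
  induction hc with
  | refl => exact Relation.ReflTransGen.refl
  | tail hxy hE ih => exact Relation.ReflTransGen.tail ih hE.2.2

def labIter (h w : Nat) (col : List Bool) : Nat → List Nat
  | 0 => List.range (h * w)
  | t + 1 => labStep h w col (labIter h w col t)

lemma getD_map_range' {α : Type} {n k : Nat} (f : Nat → α) (d : α) (hk : k < n) :
    ((List.range n).map f).getD k d = f k := by
  simp [List.getD_eq_getElem?_getD, List.getElem?_map, List.getElem?_range hk]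

lemma flatMap_grid {α : Type} (h w : Nat) (f : Nat → Nat → α) :
    (List.range h).flatMap (fun i => (List.range w).map (fun j => f i j)) =
    (List.range (h * w)).map (fun k => f (k / w) (k % w)) := by
  rcases Nat.eq_zero_or_pos w with hw | hw
  · subst hw; simp
  · induction h with
    | zero => simp
    | succ g ih =>
      rw [List.range_succ, List.flatMap_append, ih]
      rw [show (g + 1) * w = g * w + w by ring, List.range_add, List.map_append]
      congr 1
      simp only [List.flatMap_cons, List.flatMap_nil, List.append_nil, List.map_map]
      apply List.map_congr_left
      intro j hj
      rw [List.mem_range] at hj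
      have hdec := decC_eq (w := w) hw (i := g) hj
      have h1 : (g * w + j) / w = g := congrArg Prod.fst hdec
      have h2 : (g * w + j) % w = j := congrArg Prod.snd hdec
      simp only [Function.comp_apply, h1, h2]

lemma Eid_iff {h w : Nat} {col : Nat → Nat → Bool} (hw : 0 < w) {k : Nat}
    (hk : k < h * w) (z : Nat) :
    Eid h w col z k ↔
      (col (z / w) (z % w) ≠ col (k / w) (k % w)) ∧
      ((z = k + 1 ∧ k % w + 1 < w) ∨ (z + 1 = k ∧ 0 < k % w) ∨
       (z = k + w ∧ k / w + 1 < h) ∨ (z + w = k ∧ 0 < k / w)) := by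
  have az : z / w * w + z % w = z := encC_decC hw
  have ak : k / w * w + k % w = k := encC_decC hw
  have hmz : z % w < w := Nat.mod_lt _ hw
  have hmk : k % w < w := Nat.mod_lt _ hw
  constructor
  · rintro ⟨hz, hk', ⟨hp1, hp2, hq1, hq2, hcol, d, hd, e1, e2⟩⟩
    simp only [decC] at hp1 hp2 hq1 hq2 hcol e1 e2
    refine ⟨hcol, ?_⟩
    simp only [dirsA, List.mem_cons, List.not_mem_nil, or_false] at hd
    rcases hd with rfl | rfl | rfl | rfl
    · -- d = (1,0) : z + w = k
      have e1' : k / w = z / w + 1 := by omega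
      have e2' : k % w = z % w := by omega
      rw [e1', Nat.succ_mul, e2'] at ak
      refine Or.inr (Or.inr (Or.inr ⟨?_, ?_⟩))
      · generalize hA : z / w * w = A at az ak
        generalize hzm : z % w = zm at az ak
        omega
      · rw [e1']
        exact Nat.succ_pos _
    · -- d = (0,1) : z + 1 = k
      have e1' : k / w = z / w := by omega
      have e2' : k % w = z % w + 1 := by omega
      rw [e1', e2'] at ak
      refine Or.inr (Or.inl ⟨?_, ?_⟩)
      · generalize hA : z / w * w = A at az ak
        generalize hzm : z % w = zm at az ak
        omega
      · rw [e2']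
        exact Nat.succ_pos _
    · -- d = (-1,0) : z = k + w
      have e1' : z / w = k / w + 1 := by omega
      have e2' : k % w = z % w := by omega
      rw [e1', Nat.succ_mul] at az
      rw [e2'] at ak
      refine Or.inr (Or.inr (Or.inl ⟨?_, ?_⟩))
      · generalize hA : k / w * w = A at az ak
        generalize hzm : z % w = zm at az ak
        omega
      · rw [← e1']
        exact hp1
    · -- d = (0,-1) : z = k + 1
      have e1' : k / w = z / w := by omega
      have e2' : z % w = k % w + 1 := by omega
      rw [← e1', e2'] at az
      refine Or.inl ⟨?_, ?_⟩
      · generalize hA : k / w * w = A at az ak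
        generalize hkm : k % w = km at az ak
        omega
      · rw [← e2']
        exact hmz
  · rintro ⟨hcol, hcase⟩
    have hik : k / w < h := Nat.div_lt_of_lt_mul (by rw [Nat.mul_comm w h]; exact hk)
    rcases hcase with ⟨hzk, hjw⟩ | ⟨hzk, hj0⟩ | ⟨hzk, hih⟩ | ⟨hzk, hi0⟩
    · -- z = k + 1
      have hzv : z = k / w * w + (k % w + 1) := by
        generalize hA : k / w * w = A at ak ⊢
        generalize hkm : k % w = km at ak ⊢
        omega
      have hdz : decC w z = (k / w, k % w + 1) := by rw [hzv]; exact decC_eq hw hjw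
      have hzlt : z < h * w := by
        have hlt := encC_lt (h := h) (w := w) (p := (k / w, k % w + 1))
          (by simp only [gridF, Finset.mem_product, Finset.mem_range]; exact ⟨hik, hjw⟩)
        simp only [encC] at hlt
        generalize hA : k / w * w = A at hlt hzv
        generalize hkm : k % w = km at hlt hzv
        omega
      refine ⟨hzlt, hk, ?_, ?_, hik, hmk, hcol, (0, -1), by simp [dirsA], ?_, ?_⟩
      · simp only [hdz]; exact hik
      · simp only [hdz]; omega
      · rw [hdz]; simp only [decC]; push_cast; omega
      · rw [hdz]; simp only [decC]; push_cast; omega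
    · -- z + 1 = k
      have hzv : z = k / w * w + (k % w - 1) := by
        generalize hA : k / w * w = A at ak ⊢
        generalize hkm : k % w = km at ak ⊢
        omega
      have hdz : decC w z = (k / w, k % w - 1) := by rw [hzv]; exact decC_eq hw (by omega)
      refine ⟨by omega, hk, ?_, ?_, hik, hmk, hcol, (0, 1), by simp [dirsA], ?_, ?_⟩
      · simp only [hdz]; exact hik
      · simp only [hdz]; omega
      · rw [hdz]; simp only [decC]; push_cast; omega
      · rw [hdz]; simp only [decC]; push_cast; omega
    · -- z = k + w
      have hzv : z = (k / w + 1) * w + k % w := by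
        rw [Nat.succ_mul]
        generalize hA : k / w * w = A at ak ⊢
        generalize hkm : k % w = km at ak ⊢
        omega
      have hdz : decC w z = (k / w + 1, k % w) := by rw [hzv]; exact decC_eq hw hmk
      have hzlt : z < h * w := by
        have hlt := encC_lt (h := h) (w := w) (p := (k / w + 1, k % w))
          (by simp only [gridF, Finset.mem_product, Finset.mem_range]; exact ⟨hih, hmk⟩)
        simp only [encC] at hlt
        generalize hB : (k / w + 1) * w = B at hlt hzv
        generalize hkm : k % w = km at hlt hzv
        omega
      refine ⟨hzlt, hk, ?_, ?_, hik, hmk, hcol, (-1, 0), by simp [dirsA], ?_, ?_⟩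
      · simp only [hdz]; exact hih
      · simp only [hdz]; exact hmk
      · rw [hdz]; simp only [decC]; push_cast; omega
      · rw [hdz]; simp only [decC]; push_cast; omega
    · -- z + w = k
      have hsm : k / w * w = (k / w - 1) * w + w := by
        rw [← Nat.succ_mul]
        congr 1
        omega
      rw [hsm] at ak
      have hzv : z = (k / w - 1) * w + k % w := by
        generalize hA : (k / w - 1) * w = A at ak ⊢
        generalize hkm : k % w = km at ak ⊢
        omega
      have hdz : decC w z = (k / w - 1, k % w) := by rw [hzv]; exact decC_eq hw hmk
      refine ⟨by omega, hk, ?_, ?_, hik, hmk, hcol, (1, 0), by simp [dirsA], ?_, ?_⟩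
      · simp only [hdz]; omega
      · simp only [hdz]; exact hmk
      · rw [hdz]; simp only [decC]; push_cast; omega
      · rw [hdz]; simp only [decC]; push_cast; omega

lemma reachIn_self {h w : Nat} {col : Nat → Nat → Bool} (t : Nat) {k : Nat} (hk : k < h * w) :
    reachIn h w col t k k := by
  induction t with
  | zero => exact ⟨rfl, hk⟩
  | succ t ih => exact Or.inl ih

lemma reachIn_lt {h w : Nat} {col : Nat → Nat → Bool} :
    ∀ {t x y : Nat}, reachIn h w col t x y → x < h * w ∧ y < h * w := by
  intro t
  induction t with
  | zero => rintro x y ⟨rfl, hx⟩; exact ⟨hx, hx⟩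
  | succ t ih =>
    rintro x y (hr | ⟨z, hz, hE⟩)
    · exact ih hr
    · exact ⟨(ih hz).1, hE.2.1⟩

lemma reachIn_connId {h w : Nat} {col : Nat → Nat → Bool} :
    ∀ {t x y : Nat}, reachIn h w col t x y → ConnId h w col x y := by
  intro t
  induction t with
  | zero => rintro x y ⟨rfl, _⟩; exact Relation.ReflTransGen.refl
  | succ t ih =>
    rintro x y (hr | ⟨z, hz, hE⟩)
    · exact ih hr
    · exact Relation.ReflTransGen.tail (ih hz) hE

lemma Mv_nonempty {h w : Nat} {col : Nat → Nat → Bool} {t k : Nat} (hk : k < h * w) :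
    (SR h w col t k).Nonempty :=
  ⟨k, mem_cfilter.2 ⟨Finset.mem_range.2 hk, reachIn_self t hk⟩⟩

noncomputable def Mv (h w : Nat) (col : Nat → Nat → Bool) (t k : Nat) : Nat :=
  if hk : k < h * w then (SR h w col t k).min' (Mv_nonempty hk) else k

lemma Mv_mem {h w : Nat} {col : Nat → Nat → Bool} (t : Nat) {k : Nat} (hk : k < h * w) :
    reachIn h w col t (Mv h w col t k) k ∧ Mv h w col t k < h * w := by
  have := Finset.min'_mem (SR h w col t k) (Mv_nonempty (col := col) (t := t) hk)
  unfold SR at this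
  rw [mem_cfilter, Finset.mem_range] at this
  rw [Mv, dif_pos hk]
  exact ⟨this.2, this.1⟩

lemma Mv_le {h w : Nat} {col : Nat → Nat → Bool} (t : Nat) {k m : Nat} (hk : k < h * w)
    (hm : reachIn h w col t m k) : Mv h w col t k ≤ m := by
  rw [Mv, dif_pos hk]
  exact Finset.min'_le _ _ (mem_cfilter.2 ⟨Finset.mem_range.2 (reachIn_lt hm).1, hm⟩)

lemma labStep_le_self {h w : Nat} (colL : List Bool) (lab : List Nat) {k : Nat}
    (hk : k < h * w) : (labStep h w colL lab).getD k 0 ≤ lab.getD k 0 := by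
  unfold labStep
  rw [getD_map_range' _ _ hk]
  dsimp only
  split_ifs <;> omega

lemma labStep_le_nbr {h w : Nat} {col : Nat → Nat → Bool} (hw : 0 < w) (colL : List Bool)
    (hcolL : ∀ m, m < h * w → colL.getD m false = col (m / w) (m % w))
    (lab : List Nat) {k z : Nat} (hk : k < h * w) (hE : Eid h w col z k) :
    (labStep h w colL lab).getD k 0 ≤ lab.getD z 0 := by
  have hzlt : z < h * w := hE.1
  obtain ⟨hcol, hcase⟩ := (Eid_iff hw hk z).1 hE
  have hco : colL.getD k false ≠ colL.getD z false := by
    rw [hcolL k hk, hcolL z hzlt]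
    exact Ne.symm hcol
  unfold labStep
  rw [getD_map_range' _ _ hk]
  dsimp only
  rcases hcase with ⟨rfl, hg⟩ | ⟨hzk, hg⟩ | ⟨rfl, hg⟩ | ⟨hzk, hg⟩
  · rw [if_pos (show k % w + 1 < w ∧ colL.getD k false ≠ colL.getD (k + 1) false from ⟨hg, hco⟩)]
    split_ifs <;> omega
  · obtain rfl : z = k - 1 := by omega
    rw [if_pos (show 0 < k % w ∧ colL.getD k false ≠ colL.getD (k - 1) false from ⟨hg, hco⟩)]
    split_ifs <;> omega
  · rw [if_pos (show k / w + 1 < h ∧ colL.getD k false ≠ colL.getD (k + w) false from ⟨hg, hco⟩)]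
    split_ifs <;> omega
  · obtain rfl : z = k - w := by omega
    rw [if_pos (show 0 < k / w ∧ colL.getD k false ≠ colL.getD (k - w) false from ⟨hg, hco⟩)]
    split_ifs <;> omega

lemma le_labStep {h w : Nat} {col : Nat → Nat → Bool} (hw : 0 < w) (colL : List Bool)
    (hcolL : ∀ m, m < h * w → colL.getD m false = col (m / w) (m % w))
    (lab : List Nat) {x k : Nat} (hk : k < h * w)
    (hself : x ≤ lab.getD k 0)
    (hnbr : ∀ z, Eid h w col z k → x ≤ lab.getD z 0) :
    x ≤ (labStep h w colL lab).getD k 0 := by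
  have ak : k / w * w + k % w = k := encC_decC hw
  have hik : k / w < h := Nat.div_lt_of_lt_mul (by rw [Nat.mul_comm w h]; exact hk)
  have c1 : k % w + 1 < w ∧ colL.getD k false ≠ colL.getD (k + 1) false →
      x ≤ lab.getD (k + 1) 0 := by
    rintro ⟨hg, hco⟩
    have h1 : k + 1 < h * w := by
      have hlt := encC_lt (h := h) (w := w) (p := (k / w, k % w + 1))
        (by simp only [gridF, Finset.mem_product, Finset.mem_range]; exact ⟨hik, hg⟩)
      simp only [encC] at hlt
      generalize hA : k / w * w = A at hlt ak
      generalize hkm : k % w = km at hlt ak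
      omega
    refine hnbr _ ((Eid_iff hw hk _).2 ⟨?_, Or.inl ⟨rfl, hg⟩⟩)
    rw [hcolL k hk, hcolL (k + 1) h1] at hco
    exact Ne.symm hco
  have c2 : 0 < k % w ∧ colL.getD k false ≠ colL.getD (k - 1) false →
      x ≤ lab.getD (k - 1) 0 := by
    rintro ⟨hg, hco⟩
    have h1 : k - 1 < h * w := by omega
    refine hnbr _ ((Eid_iff hw hk _).2 ⟨?_, Or.inr (Or.inl ⟨by omega, hg⟩)⟩)
    rw [hcolL k hk, hcolL (k - 1) h1] at hco
    exact Ne.symm hco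
  have c3 : k / w + 1 < h ∧ colL.getD k false ≠ colL.getD (k + w) false →
      x ≤ lab.getD (k + w) 0 := by
    rintro ⟨hg, hco⟩
    have h1 : k + w < h * w := by
      have hlt := encC_lt (h := h) (w := w) (p := (k / w + 1, k % w))
        (by simp only [gridF, Finset.mem_product, Finset.mem_range]; exact ⟨hg, Nat.mod_lt _ hw⟩)
      simp only [encC, Nat.succ_mul] at hlt
      generalize hA : k / w * w = A at hlt ak
      generalize hkm : k % w = km at hlt ak
      omega
    refine hnbr _ ((Eid_iff hw hk _).2 ⟨?_, Or.inr (Or.inr (Or.inl ⟨rfl, hg⟩))⟩)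
    rw [hcolL k hk, hcolL (k + w) h1] at hco
    exact Ne.symm hco
  have c4 : 0 < k / w ∧ colL.getD k false ≠ colL.getD (k - w) false →
      x ≤ lab.getD (k - w) 0 := by
    rintro ⟨hg, hco⟩
    have hwk : w ≤ k := by
      generalize hA : k / w * w = A at ak
      have : w ≤ k / w * w := by
        rw [← hA] at *
        calc w = 1 * w := by ring
          _ ≤ k / w * w := Nat.mul_le_mul_right w hg
      omega
    have h1 : k - w < h * w := by omega
    refine hnbr _ ((Eid_iff hw hk _).2 ⟨?_, Or.inr (Or.inr (Or.inr ⟨by omega, hg⟩))⟩)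
    rw [hcolL k hk, hcolL (k - w) h1] at hco
    exact Ne.symm hco
  unfold labStep
  rw [getD_map_range' _ _ hk]
  dsimp only
  split_ifs
  all_goals try have d1 := c1 (by assumption)
  all_goals try have d2 := c2 (by assumption)
  all_goals try have d3 := c3 (by assumption)
  all_goals try have d4 := c4 (by assumption)
  all_goals omega

lemma labIter_getD {h w : Nat} {col : Nat → Nat → Bool} (hw : 0 < w) (colL : List Bool)
    (hcolL : ∀ m, m < h * w → colL.getD m false = col (m / w) (m % w)) :
    ∀ t k, k < h * w → (labIter h w colL t).getD k 0 = Mv h w col t k := by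
  intro t
  induction t with
  | zero =>
    intro k hk
    have hS : SR h w col 0 k = {k} := by
      unfold SR
      ext m
      rw [mem_cfilter, Finset.mem_range, Finset.mem_singleton]
      show m < h * w ∧ (m = k ∧ m < h * w) ↔ m = k
      constructor
      · rintro ⟨_, rfl, _⟩; rfl
      · rintro rfl; exact ⟨hk, rfl, hk⟩
    show (List.range (h * w)).getD k 0 = _
    rw [Mv, dif_pos hk]
    simp only [hS, List.getD_eq_getElem?_getD, List.getElem?_range hk]
    exact (Finset.min'_singleton k).symm
  | succ t ih =>
    intro k hk
    show (labStep h w colL (labIter h w colL t)).getD k 0 = Mv h w col (t + 1) k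
    apply le_antisymm
    · obtain ⟨hreach, hxlt⟩ := Mv_mem (col := col) (t + 1) hk
      rcases hreach with hr | ⟨z, hrz, hE⟩
      · calc (labStep h w colL (labIter h w colL t)).getD k 0
            ≤ (labIter h w colL t).getD k 0 := labStep_le_self colL _ hk
          _ = Mv h w col t k := ih k hk
          _ ≤ Mv h w col (t + 1) k := Mv_le t hk hr
      · calc (labStep h w colL (labIter h w colL t)).getD k 0
            ≤ (labIter h w colL t).getD z 0 := labStep_le_nbr hw colL hcolL _ hk hE
          _ = Mv h w col t z := ih z hE.1
          _ ≤ Mv h w col (t + 1) k := Mv_le (t := t) hE.1 hrz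
    · apply le_labStep hw colL hcolL _ hk
      · rw [ih k hk]
        exact Mv_le (t := t + 1) hk (Or.inl (Mv_mem t hk).1)
      · intro z hE
        rw [ih z hE.1]
        exact Mv_le (t := t + 1) hk (Or.inr ⟨z, (Mv_mem t hE.1).1, hE⟩)


lemma labIter_length {h w : Nat} (colL : List Bool) :
    ∀ t, (labIter h w colL t).length = h * w := by
  intro t
  induction t with
  | zero => exact List.length_range
  | succ t _ =>
    show (labStep h w colL (labIter h w colL t)).length = h * w
    unfold labStep
    rw [List.length_map, List.length_range]

lemma sum_lt_pointwise :
    ∀ (l1 l2 : List Nat), l1.length = l2.length →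
      (∀ i, i < l1.length → l1.getD i 0 ≤ l2.getD i 0) → l1 ≠ l2 → l1.sum < l2.sum := by
  intro l1
  induction l1 with
  | nil =>
    intro l2 hlen _ hne
    exact absurd (List.length_eq_zero_iff.1 hlen.symm).symm hne
  | cons a t1 ih =>
    intro l2 hlen hle hne
    cases l2 with
    | nil => simp at hlen
    | cons b t2 =>
      have ha : a ≤ b := hle 0 (by simp)
      have hlen' : t1.length = t2.length := by simpa using hlen
      have hle' : ∀ i, i < t1.length → t1.getD i 0 ≤ t2.getD i 0 := by
        intro i hi
        have := hle (i + 1) (by simp; omega)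
        simpa using this
      by_cases ht : t1 = t2
      · subst ht
        have hab : a ≠ b := by
          intro hab
          exact hne (by rw [hab])
        simp only [List.sum_cons]
        omega
      · have := ih t2 hlen' hle' ht
        simp only [List.sum_cons]
        omega

lemma sum_range_le : ∀ n : Nat, (List.range n).sum ≤ n * n := by
  intro n
  induction n with
  | zero => simp
  | succ m ih =>
    rw [List.range_succ, List.sum_append]
    have : (m + 1) * (m + 1) = m * m + 2 * m + 1 := by ring
    simp only [List.sum_cons, List.sum_nil]
    omega

lemma labLoop_fix {h w : Nat} {col : Nat → Nat → Bool} (hw : 0 < w) (colL : List Bool)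
    (hcolL : ∀ m, m < h * w → colL.getD m false = col (m / w) (m % w)) :
    ∀ fuel t, (labIter h w colL t).sum < fuel →
      ∃ t', labLoop h w colL fuel (labIter h w colL t) = labIter h w colL t' ∧
        labStep h w colL (labIter h w colL t') = labIter h w colL t' := by
  intro fuel
  induction fuel with
  | zero => intro t h0; omega
  | succ f ih =>
    intro t hsum
    by_cases hfix : labStep h w colL (labIter h w colL t) = labIter h w colL t
    · exact ⟨t, by simp [labLoop, hfix], hfix⟩
    · have hstep : labStep h w colL (labIter h w colL t) = labIter h w colL (t + 1) := rfl
      have hlt : (labIter h w colL (t + 1)).sum < (labIter h w colL t).sum := by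
        apply sum_lt_pointwise
        · rw [labIter_length, labIter_length]
        · intro i hi
          rw [labIter_length] at hi
          rw [labIter_getD hw colL hcolL (t + 1) i hi, labIter_getD hw colL hcolL t i hi]
          exact Mv_le (t := t + 1) hi (Or.inl (Mv_mem t hi).1)
        · rw [← hstep]
          exact fun hcontra => hfix (by rw [hstep]; exact hcontra.symm ▸ hstep.symm ▸ rfl)
      obtain ⟨t', h1, h2⟩ := ih (t + 1) (by omega)
      refine ⟨t', ?_, h2⟩
      show (let new := labStep h w colL (labIter h w colL t);
        if new = labIter h w colL t then labIter h w colL t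
        else labLoop h w colL f new) = labIter h w colL t'
      simp only [hfix, if_false]
      rw [hstep]
      exact h1

lemma fix_rho {h w : Nat} {col : Nat → Nat → Bool} (hw : 0 < w) (colL : List Bool)
    (hcolL : ∀ m, m < h * w → colL.getD m false = col (m / w) (m % w)) {t : Nat}
    (hfix : labStep h w colL (labIter h w colL t) = labIter h w colL t) :
    ∀ k, k < h * w → (labIter h w colL t).getD k 0 = rho h w col k := by
  intro k hk
  rw [labIter_getD hw colL hcolL t k hk]
  have edge : ∀ z y, Eid h w col z y → Mv h w col t y ≤ Mv h w col t z := by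
    intro z y hE
    have hy : y < h * w := hE.2.1
    have hz : z < h * w := hE.1
    calc Mv h w col t y = (labIter h w colL t).getD y 0 :=
          (labIter_getD hw colL hcolL t y hy).symm
      _ = (labStep h w colL (labIter h w colL t)).getD y 0 := by rw [hfix]
      _ ≤ (labIter h w colL t).getD z 0 := labStep_le_nbr hw colL hcolL _ hy hE
      _ = Mv h w col t z := labIter_getD hw colL hcolL t z hz
  have path : ∀ x y, ConnId h w col x y → Mv h w col t y ≤ Mv h w col t x := by
    intro x y hc
    induction hc with
    | refl => exact le_refl _
    | tail _ hE ih => exact le_trans (edge _ _ hE) ih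
  have hrmem := Finset.min'_mem (classSet h w col k) (classSet_nonempty hk)
  unfold classSet at hrmem
  rw [mem_cfilter, Finset.mem_range] at hrmem
  obtain ⟨hrlt, hrconn⟩ := hrmem
  have hrho : rho h w col k = (classSet h w col k).min' (classSet_nonempty hk) := by
    rw [rho, dif_pos hk]
  apply le_antisymm
  · -- Mv t k ≤ rho k
    rw [hrho]
    calc Mv h w col t k
        ≤ Mv h w col t ((classSet h w col k).min' (classSet_nonempty hk)) := path _ _ hrconn
      _ ≤ (classSet h w col k).min' (classSet_nonempty hk) :=
          Mv_le t hrlt (reachIn_self t hrlt)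
  · -- rho k ≤ Mv t k
    rw [hrho]
    apply Finset.min'_le
    show _ ∈ classSet h w col k
    unfold classSet
    rw [mem_cfilter, Finset.mem_range]
    exact ⟨(Mv_mem t hk).2, reachIn_connId (Mv_mem t hk).1⟩


def cntF (lab : List Nat) (colL : List Bool) (st : (Nat → Int) × (Nat → Int)) (k : Nat) :
    (Nat → Int) × (Nat → Int) :=
  ((fun y => if y = lab.getD k 0 then st.1 y + (if colL.getD k false then 1 else 0) else st.1 y),
   (fun y => if y = lab.getD k 0 then st.2 y + 1 else st.2 y))

lemma cnt_fold (lab : List Nat) (colL : List Bool) :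
    ∀ (L : List Nat) (st0 : (Nat → Int) × (Nat → Int)) (x : Nat),
      ((L.foldl (cntF lab colL) st0).1 x =
        st0.1 x + (L.countP (fun k => lab.getD k 0 == x && colL.getD k false) : Int)) ∧
      ((L.foldl (cntF lab colL) st0).2 x =
        st0.2 x + (L.countP (fun k => lab.getD k 0 == x) : Int)) := by
  intro L
  induction L with
  | nil => intro st0 x; simp
  | cons a L ih =>
    intro st0 x
    obtain ⟨ih1, ih2⟩ := ih (cntF lab colL st0 a) x
    rw [List.foldl_cons]
    constructor
    · rw [ih1, List.countP_cons]
      simp only [cntF]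
      by_cases hx : x = lab.getD a 0
      · subst hx
        have hbe : ((lab.getD a 0 == lab.getD a 0) && colL.getD a false) = colL.getD a false := by
          simp
        rw [if_pos rfl, hbe]
        push_cast
        split_ifs <;> ring
      · rw [if_neg hx]
        have h0 : (lab.getD a 0 == x) = false :=
          beq_eq_false_iff_ne.2 (fun hh => hx hh.symm)
        rw [h0, Bool.false_and]
        simp
    · rw [ih2, List.countP_cons]
      simp only [cntF]
      by_cases hx : x = lab.getD a 0
      · subst hx
        have hbe : (lab.getD a 0 == lab.getD a 0) = true := by simp
        rw [if_pos rfl, hbe, if_pos rfl]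
        push_cast
        ring
      · rw [if_neg hx]
        have h0 : (lab.getD a 0 == x) = false :=
          beq_eq_false_iff_ne.2 (fun hh => hx hh.symm)
        rw [h0]
        simp

lemma countP_range_card (n : Nat) (p : Nat → Bool) :
    (List.range n).countP p = (cfilter (fun k => p k = true) (Finset.range n)).card := by
  induction n with
  | zero =>
    rw [show Finset.range 0 = ∅ from rfl, cfilter_of_false (fun x hx => by simp at hx)]
    simp
  | succ m ih =>
    rw [List.range_succ, List.countP_append, Finset.range_add_one]
    have hm : m ∉ cfilter (fun k => p k = true) (Finset.range m) := by
      intro hmem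
      exact absurd (mem_cfilter.1 hmem).1 (by simp)
    by_cases hp : p m = true
    · rw [cfilter_insert_pos (p := fun k => p k = true) hp, Finset.card_insert_of_notMem hm, ← ih]
      simp [hp]
    · rw [cfilter_insert_neg (p := fun k => p k = true) hp, ← ih]
      simp [hp]

lemma rho_lt {h w : Nat} {col : Nat → Nat → Bool} {k : Nat} (hk : k < h * w) :
    rho h w col k < h * w := by
  have := Finset.min'_mem (classSet h w col k) (classSet_nonempty hk)
  unfold classSet at this
  rw [mem_cfilter, Finset.mem_range] at this
  rw [rho, dif_pos hk]
  exact this.1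

lemma rho_connId {h w : Nat} {col : Nat → Nat → Bool} {k : Nat} (hk : k < h * w) :
    ConnId h w col (rho h w col k) k := by
  have := Finset.min'_mem (classSet h w col k) (classSet_nonempty hk)
  unfold classSet at this
  rw [mem_cfilter] at this
  rw [rho, dif_pos hk]
  exact this.2

lemma rho_eq_iff {h w : Nat} {col : Nat → Nat → Bool} {k m : Nat}
    (hk : k < h * w) (hm : m < h * w) :
    rho h w col k = rho h w col m ↔ ConnId h w col k m := by
  constructor
  · intro heq
    have h1 := rho_connId (col := col) hk
    have h2 := rho_connId (col := col) hm
    rw [heq] at h1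
    exact Relation.ReflTransGen.trans (ConnId_symm h1) h2
  · intro hc
    have hset : classSet h w col k = classSet h w col m := by
      unfold classSet
      apply cfilter_congr
      intro x _
      exact ⟨fun hx => Relation.ReflTransGen.trans hx hc,
             fun hx => Relation.ReflTransGen.trans hx (ConnId_symm hc)⟩
    rw [rho, dif_pos hk, rho, dif_pos hm]
    apply le_antisymm
    · exact Finset.min'_le _ _ (by rw [hset]; exact Finset.min'_mem _ _)
    · exact Finset.min'_le _ _ (by rw [← hset]; exact Finset.min'_mem _ _)

lemma Nid_eq_Npairs (h w : Nat) (col : Nat → Nat → Bool) (hw : 0 < w) :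
    (cfilter (fun pr : Nat × Nat => ConnId h w col pr.1 pr.2 ∧
        col (pr.1 / w) (pr.1 % w) = true ∧ col (pr.2 / w) (pr.2 % w) = false)
      (Finset.range (h * w) ×ˢ Finset.range (h * w))).card = Npairs h w col := by
  unfold Npairs
  apply Finset.card_bij (i := fun pr _ => (decC w pr.1, decC w pr.2))
  · rintro pr hpr
    rw [mem_cfilter] at hpr
    obtain ⟨hmem, hconn, hc1, hc2⟩ := hpr
    obtain ⟨hm1, hm2⟩ := Finset.mem_product.1 hmem
    rw [Finset.mem_range] at hm1 hm2
    rw [mem_cfilter]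
    exact ⟨Finset.mem_product.2 ⟨decC_grid hw hm1, decC_grid hw hm2⟩,
      conn_of_connId hconn, hc1, hc2⟩
  · rintro a ha b hb heq
    have h1 : decC w a.1 = decC w b.1 := congrArg Prod.fst heq
    have h2 : decC w a.2 = decC w b.2 := congrArg Prod.snd heq
    have e1 : a.1 = b.1 := by
      have := congrArg (encC w) h1
      rwa [encC_decC hw, encC_decC hw] at this
    have e2 : a.2 = b.2 := by
      have := congrArg (encC w) h2
      rwa [encC_decC hw, encC_decC hw] at this
    exact Prod.ext e1 e2
  · rintro b hb
    rw [mem_cfilter] at hb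
    obtain ⟨hmem, hconn, hc1, hc2⟩ := hb
    obtain ⟨hm1, hm2⟩ := Finset.mem_product.1 hmem
    have h12 : b.1.2 < w := by simpa using (Finset.mem_product.1 hm1).2
    have h22 : b.2.2 < w := by simpa using (Finset.mem_product.1 hm2).2
    have hd1 : decC w (encC w b.1) = b.1 := by
      rw [show encC w b.1 = b.1.1 * w + b.1.2 from rfl, decC_eq hw h12]
    have hd2 : decC w (encC w b.2) = b.2 := by
      rw [show encC w b.2 = b.2.1 * w + b.2.2 from rfl, decC_eq hw h22]
    refine ⟨(encC w b.1, encC w b.2), ?_, ?_⟩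
    · rw [mem_cfilter]
      refine ⟨Finset.mem_product.2 ⟨Finset.mem_range.2 (encC_lt hm1),
          Finset.mem_range.2 (encC_lt hm2)⟩, ?_, ?_, ?_⟩
      · exact connId_of_conn hw hconn hm1
      · have e1 : encC w b.1 / w = b.1.1 := congrArg Prod.fst hd1
        have e2 : encC w b.1 % w = b.1.2 := congrArg Prod.snd hd1
        rw [e1, e2]
        exact hc1
      · have e1 : encC w b.2 / w = b.2.1 := congrArg Prod.fst hd2
        have e2 : encC w b.2 % w = b.2.2 := congrArg Prod.snd hd2
        rw [e1, e2]
        exact hc2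
    · exact Prod.ext hd1 hd2

lemma sum_finset_range_eq (n : Nat) (f : Nat → Nat) :
    ∑ i ∈ Finset.range n, f i = ((List.range n).map f).sum := by
  induction n with
  | zero => simp
  | succ m ih =>
    rw [Finset.sum_range_succ, List.range_succ, List.map_append, List.sum_append, ih]
    simp

lemma sum_map_natCast (l : List Nat) (f : Nat → Nat) :
    (l.map (fun x => ((f x : Nat) : Int))).sum = (((l.map f).sum : Nat) : Int) := by
  induction l with
  | nil => simp
  | cons a l ih => simp only [List.map_cons, List.sum_cons, ih]; push_cast; ring

lemma editorial_alt_eq (H W : Int) (S : List String) (hH : 0 < H) (hW : 0 < W) :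
    editorial_alt H W S = ((Npairs H.toNat W.toNat (colAt S) : Nat) : Int) := by
  have hw : 0 < W.toNat := by omega
  have hcond : ¬(H ≤ 0 ∨ W ≤ 0) := by
    rintro (hc | hc) <;> omega
  -- abbreviations (all plain terms)
  have hcolL : ∀ m, m < H.toNat * W.toNat →
      ((List.range H.toNat).flatMap
        (fun i => (List.range W.toNat).map (fun j => colAt S i j))).getD m false =
      colAt S (m / W.toNat) (m % W.toNat) := by
    intro m hm
    rw [flatMap_grid]
    exact getD_map_range' _ _ hm
  obtain ⟨t', hloop, hfix⟩ := labLoop_fix (h := H.toNat) (w := W.toNat) (col := colAt S) hw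
    ((List.range H.toNat).flatMap (fun i => (List.range W.toNat).map (fun j => colAt S i j)))
    hcolL ((H.toNat * W.toNat) * (H.toNat * W.toNat) + 1) 0
    (by
      have := sum_range_le (H.toNat * W.toNat)
      show (List.range (H.toNat * W.toNat)).sum < _
      omega)
  have hlab : ∀ k, k < H.toNat * W.toNat →
      (labIter H.toNat W.toNat
        ((List.range H.toNat).flatMap (fun i => (List.range W.toNat).map (fun j => colAt S i j)))
        t').getD k 0 = rho H.toNat W.toNat (colAt S) k :=
    fix_rho hw _ hcolL hfix
  -- unfold the port into the cntF form, with the label loop replaced by labIter t'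
  have e0 : editorial_alt H W S =
      ((List.range (H.toNat * W.toNat)).map (fun r =>
        ((List.range (H.toNat * W.toNat)).foldl
          (cntF (labIter H.toNat W.toNat
              ((List.range H.toNat).flatMap (fun i => (List.range W.toNat).map (fun j => colAt S i j))) t')
            ((List.range H.toNat).flatMap (fun i => (List.range W.toNat).map (fun j => colAt S i j))))
          ((fun _ => 0), (fun _ => 0))).1 r *
        (((List.range (H.toNat * W.toNat)).foldl
          (cntF (labIter H.toNat W.toNat
              ((List.range H.toNat).flatMap (fun i => (List.range W.toNat).map (fun j => colAt S i j))) t')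
            ((List.range H.toNat).flatMap (fun i => (List.range W.toNat).map (fun j => colAt S i j))))
          ((fun _ => 0), (fun _ => 0))).2 r -
         ((List.range (H.toNat * W.toNat)).foldl
          (cntF (labIter H.toNat W.toNat
              ((List.range H.toNat).flatMap (fun i => (List.range W.toNat).map (fun j => colAt S i j))) t')
            ((List.range H.toNat).flatMap (fun i => (List.range W.toNat).map (fun j => colAt S i j))))
          ((fun _ => 0), (fun _ => 0))).1 r))).sum := by
    have estep : editorial_alt H W S =
        ((List.range (H.toNat * W.toNat)).map (fun r =>
          ((List.range (H.toNat * W.toNat)).foldl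
            (cntF (labLoop H.toNat W.toNat
                ((List.range H.toNat).flatMap (fun i => (List.range W.toNat).map (fun j => colAt S i j)))
                ((H.toNat * W.toNat) * (H.toNat * W.toNat) + 1) (List.range (H.toNat * W.toNat)))
              ((List.range H.toNat).flatMap (fun i => (List.range W.toNat).map (fun j => colAt S i j))))
            ((fun _ => 0), (fun _ => 0))).1 r *
          (((List.range (H.toNat * W.toNat)).foldl
            (cntF (labLoop H.toNat W.toNat
                ((List.range H.toNat).flatMap (fun i => (List.range W.toNat).map (fun j => colAt S i j)))
                ((H.toNat * W.toNat) * (H.toNat * W.toNat) + 1) (List.range (H.toNat * W.toNat)))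
              ((List.range H.toNat).flatMap (fun i => (List.range W.toNat).map (fun j => colAt S i j))))
            ((fun _ => 0), (fun _ => 0))).2 r -
           ((List.range (H.toNat * W.toNat)).foldl
            (cntF (labLoop H.toNat W.toNat
                ((List.range H.toNat).flatMap (fun i => (List.range W.toNat).map (fun j => colAt S i j)))
                ((H.toNat * W.toNat) * (H.toNat * W.toNat) + 1) (List.range (H.toNat * W.toNat)))
              ((List.range H.toNat).flatMap (fun i => (List.range W.toNat).map (fun j => colAt S i j))))
            ((fun _ => 0), (fun _ => 0))).1 r))).sum := by
      unfold editorial_alt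
      rw [if_neg hcond]
      rfl
    rw [estep]
    have hloop' : labLoop H.toNat W.toNat
        ((List.range H.toNat).flatMap (fun i => (List.range W.toNat).map (fun j => colAt S i j)))
        ((H.toNat * W.toNat) * (H.toNat * W.toNat) + 1) (List.range (H.toNat * W.toNat)) =
        labIter H.toNat W.toNat
          ((List.range H.toNat).flatMap (fun i => (List.range W.toNat).map (fun j => colAt S i j))) t' :=
      hloop
    rw [hloop']
  rw [e0]
  -- evaluate the two counters
  have hc1 := fun r => (cnt_fold
    (labIter H.toNat W.toNat
      ((List.range H.toNat).flatMap (fun i => (List.range W.toNat).map (fun j => colAt S i j))) t')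
    ((List.range H.toNat).flatMap (fun i => (List.range W.toNat).map (fun j => colAt S i j)))
    (List.range (H.toNat * W.toNat)) ((fun _ => 0), (fun _ => 0)) r).1
  have hc2 := fun r => (cnt_fold
    (labIter H.toNat W.toNat
      ((List.range H.toNat).flatMap (fun i => (List.range W.toNat).map (fun j => colAt S i j))) t')
    ((List.range H.toNat).flatMap (fun i => (List.range W.toNat).map (fun j => colAt S i j)))
    (List.range (H.toNat * W.toNat)) ((fun _ => 0), (fun _ => 0)) r).2
  simp only [hc1, hc2, zero_add]
  -- replace labels by rho and colours by colAt, then go to Finset cards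
  have hcnt1 : ∀ r, (List.range (H.toNat * W.toNat)).countP (fun k =>
      (labIter H.toNat W.toNat
        ((List.range H.toNat).flatMap (fun i => (List.range W.toNat).map (fun j => colAt S i j)))
        t').getD k 0 == r &&
      ((List.range H.toNat).flatMap
        (fun i => (List.range W.toNat).map (fun j => colAt S i j))).getD k false) =
      (cfilter (fun k => rho H.toNat W.toNat (colAt S) k = r ∧
        colAt S (k / W.toNat) (k % W.toNat) = true) (Finset.range (H.toNat * W.toNat))).card := by
    intro r
    rw [List.countP_congr (fun k hk => ?_), countP_range_card (H.toNat * W.toNat)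
      (fun k => decide (rho H.toNat W.toNat (colAt S) k = r) && colAt S (k / W.toNat) (k % W.toNat))]
    · exact congrArg Finset.card (cfilter_congr (fun k _ => by
        simp [Bool.and_eq_true]))
    · rw [List.mem_range] at hk
      rw [hlab k hk, hcolL k hk]
      simp [beq_iff_eq]
  have hcnt2 : ∀ r, (List.range (H.toNat * W.toNat)).countP (fun k =>
      (labIter H.toNat W.toNat
        ((List.range H.toNat).flatMap (fun i => (List.range W.toNat).map (fun j => colAt S i j)))
        t').getD k 0 == r) =
      (cfilter (fun k => rho H.toNat W.toNat (colAt S) k = r)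
        (Finset.range (H.toNat * W.toNat))).card := by
    intro r
    rw [List.countP_congr (fun k hk => ?_), countP_range_card (H.toNat * W.toNat)
      (fun k => decide (rho H.toNat W.toNat (colAt S) k = r))]
    · exact congrArg Finset.card (cfilter_congr (fun k _ => by simp))
    · rw [List.mem_range] at hk
      rw [hlab k hk]
      simp [beq_iff_eq]
  simp only [hcnt1, hcnt2]
  -- split the class size into black and white parts
  have hsplit : ∀ r, (cfilter (fun k => rho H.toNat W.toNat (colAt S) k = r)
      (Finset.range (H.toNat * W.toNat))).card =
      (cfilter (fun k => rho H.toNat W.toNat (colAt S) k = r ∧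
        colAt S (k / W.toNat) (k % W.toNat) = true) (Finset.range (H.toNat * W.toNat))).card +
      (cfilter (fun k => rho H.toNat W.toNat (colAt S) k = r ∧
        colAt S (k / W.toNat) (k % W.toNat) = false) (Finset.range (H.toNat * W.toNat))).card := by
    intro r
    rw [← Finset.card_union_of_disjoint]
    · congr 1
      ext k
      simp only [mem_cfilter, Finset.mem_union]
      constructor
      · rintro ⟨hk, hr⟩
        by_cases hcase : colAt S (k / W.toNat) (k % W.toNat) = true
        · exact Or.inl ⟨hk, hr, hcase⟩
        · exact Or.inr ⟨hk, hr, by simpa using hcase⟩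
      · rintro (⟨hk, hr, _⟩ | ⟨hk, hr, _⟩) <;> exact ⟨hk, hr⟩
    · rw [Finset.disjoint_left]
      rintro k h1 h2
      rw [mem_cfilter] at h1 h2
      rw [h1.2.2] at h2
      simp at h2
  have hterm : ∀ r : Nat,
      ((cfilter (fun k => rho H.toNat W.toNat (colAt S) k = r ∧
          colAt S (k / W.toNat) (k % W.toNat) = true) (Finset.range (H.toNat * W.toNat))).card : Int) *
        (((cfilter (fun k => rho H.toNat W.toNat (colAt S) k = r)
          (Finset.range (H.toNat * W.toNat))).card : Int) -
         ((cfilter (fun k => rho H.toNat W.toNat (colAt S) k = r ∧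
          colAt S (k / W.toNat) (k % W.toNat) = true) (Finset.range (H.toNat * W.toNat))).card : Int)) =
      (((cfilter (fun k => rho H.toNat W.toNat (colAt S) k = r ∧
          colAt S (k / W.toNat) (k % W.toNat) = true) (Finset.range (H.toNat * W.toNat))).card *
        (cfilter (fun k => rho H.toNat W.toNat (colAt S) k = r ∧
          colAt S (k / W.toNat) (k % W.toNat) = false) (Finset.range (H.toNat * W.toNat))).card : Nat) : Int) := by
    intro r
    rw [hsplit r]
    push_cast
    ring
  simp only [hterm]
  rw [sum_map_natCast (List.range (H.toNat * W.toNat)), ← sum_finset_range_eq]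
  congr 1
  -- double counting: sum over labels of black*white = number of connected black-white pairs
  have hmap : ∀ pr ∈ cfilter (fun pr : Nat × Nat =>
      ConnId H.toNat W.toNat (colAt S) pr.1 pr.2 ∧
      colAt S (pr.1 / W.toNat) (pr.1 % W.toNat) = true ∧
      colAt S (pr.2 / W.toNat) (pr.2 % W.toNat) = false)
      (Finset.range (H.toNat * W.toNat) ×ˢ Finset.range (H.toNat * W.toNat)),
      rho H.toNat W.toNat (colAt S) pr.1 ∈ Finset.range (H.toNat * W.toNat) := by
    intro pr hpr
    rw [mem_cfilter] at hpr
    have := (Finset.mem_product.1 hpr.1).1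
    rw [Finset.mem_range] at this ⊢
    exact rho_lt this
  have hdouble := Finset.card_eq_sum_card_fiberwise hmap
  rw [← Nid_eq_Npairs H.toNat W.toNat (colAt S) hw, hdouble]
  apply Finset.sum_congr rfl
  intro r hr
  have hfib : (cfilter (fun pr : Nat × Nat =>
      ConnId H.toNat W.toNat (colAt S) pr.1 pr.2 ∧
      colAt S (pr.1 / W.toNat) (pr.1 % W.toNat) = true ∧
      colAt S (pr.2 / W.toNat) (pr.2 % W.toNat) = false)
      (Finset.range (H.toNat * W.toNat) ×ˢ Finset.range (H.toNat * W.toNat))).filter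
      (fun pr => rho H.toNat W.toNat (colAt S) pr.1 = r) =
      (cfilter (fun k => rho H.toNat W.toNat (colAt S) k = r ∧
        colAt S (k / W.toNat) (k % W.toNat) = true) (Finset.range (H.toNat * W.toNat))) ×ˢ
      (cfilter (fun k => rho H.toNat W.toNat (colAt S) k = r ∧
        colAt S (k / W.toNat) (k % W.toNat) = false) (Finset.range (H.toNat * W.toNat))) := by
    ext pr
    rw [Finset.mem_filter, mem_cfilter, Finset.mem_product, Finset.mem_product,
      mem_cfilter, mem_cfilter]
    constructor
    · rintro ⟨⟨⟨hm1, hm2⟩, hconn, hb, hwt⟩, hr1⟩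
      have hlt1 : pr.1 < H.toNat * W.toNat := Finset.mem_range.1 hm1
      have hlt2 : pr.2 < H.toNat * W.toNat := Finset.mem_range.1 hm2
      have hr2 : rho H.toNat W.toNat (colAt S) pr.2 = r := by
        rw [← hr1]
        exact ((rho_eq_iff hlt2 hlt1).2 (ConnId_symm hconn))
      exact ⟨⟨hm1, hr1, hb⟩, ⟨hm2, hr2, hwt⟩⟩
    · rintro ⟨⟨hm1, hr1, hb⟩, ⟨hm2, hr2, hwt⟩⟩
      have hlt1 : pr.1 < H.toNat * W.toNat := Finset.mem_range.1 hm1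
      have hlt2 : pr.2 < H.toNat * W.toNat := Finset.mem_range.1 hm2
      refine ⟨⟨⟨hm1, hm2⟩, ?_, hb, hwt⟩, hr1⟩
      exact (rho_eq_iff hlt1 hlt2).1 (by rw [hr1, hr2])
  rw [hfib, Finset.card_product]

-- ===== VERDICT (by name: the statement is the Claim_ definition above) =====
theorem editorial_spec : Claim_equal_editorial := by
  intro H W S _ _
  unfold Spec_editorial
  by_cases hc : 0 < H ∧ 0 < W
  · rw [editorial_eq_Npairs, editorial_alt_eq H W S hc.1 hc.2]
  · have hcond : H ≤ 0 ∨ W ≤ 0 := by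
      rcases not_and_or.1 hc with hh | hh
      · exact Or.inl (by omega)
      · exact Or.inr (by omega)
    have halt : editorial_alt H W S = 0 := by
      unfold editorial_alt
      rw [if_pos hcond]
    have hempty : gridF H.toNat W.toNat = ∅ := by
      rcases hcond with hh | hh
      · have h0 : H.toNat = 0 := by omega
        simp [gridF, h0]
      · have h0 : W.toNat = 0 := by omega
        simp [gridF, h0]
    rw [halt, editorial_eq_Npairs]
    unfold Npairs
    rw [cfilter_of_false (fun x hx => ?_)]
    · simp
    · rw [hempty] at hx
      simp at hx
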